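-- pv_equiv track=rewrite | github.com/Satya-anshu/AoC | 2021/Day_18/18.py | reduce_expr
-- ===== SOURCE A (Python) =====
-- def reduce_expr(expr):
--     l = list(expr)
--     while True:
--         a = []
--         for i in range(len(l)):
--             if l[i] == '[':
--                 a.append(i)
--             elif l[i] == ']':
--                 a.pop()
--             # Found a pair to explode
--             if len(a) == 5 and l[i+4] == ']':
--                 break
--
--         # Find 2 digit numbers in the list
--         for k in range(len(l)):
--             if len(l[k]) > 1:
--                 break
--
--         # Always explode first!
--         if i != len(l) - 1:
--             # Get the 2 numbers
--             nums = [int(n) for n in (l[i+1],l[i+3])]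
--
--             # Check right
--             for w in range(i+5,len(l)):
--                 if l[w].isdigit():
--                     break
--             if w != len(l) -1:
--                 l[w] = str(int(l[w]) + nums[1])
--
--             # Check left
--             for q in range(i-1,-1,-1):
--                 if l[q].isdigit():
--                     break
--             if q != 0:
--                 l[q] = str(int(l[q]) + nums[0])
--
--             # Create new list after explosion
--             l = l[:i] + ['0'] + l[i+5:]
--
--         # If can't explode, try to split the number
--         elif k != len(l) - 1:
--             # Split the number into 2
--             l = l[:k] + ["[", str(int(l[k])//2), ",", str((int(l[k])+1)//2),"]"] + l[k+1:]
--
--         # Else, Done!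
--         else:
--             break
--
--     return ''.join(l)
-- ===== SOURCE B (Python) =====
-- # Tree-based reimplementation: parse the (single-digit snailfish) expression into a
-- # nested pair tree, reduce it with recursive explode/split, then serialize; strings
-- # that do not parse are returned unchanged.
--
-- def reduce_expr(expr):
--     def parse(s, i):
--         if s[i] == '[':
--             left, i = parse(s, i + 1)
--             assert s[i] == ','
--             right, i = parse(s, i + 1)
--             assert s[i] == ']'
--             return (left, right), i + 1
--         assert s[i].isdigit()
--         return int(s[i]), i + 1
--
--     def add_leftmost(t, v):
--         if isinstance(t, int):
--             return t + v
--         return (add_leftmost(t[0], v), t[1])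
--
--     def add_rightmost(t, v):
--         if isinstance(t, int):
--             return t + v
--         return (t[0], add_rightmost(t[1], v))
--
--     def explode(t, d):
--         # returns None, or (new_subtree, pending_left_add_or_None, pending_right_add_or_None)
--         if isinstance(t, int):
--             return None
--         a, b = t
--         if d >= 4 and isinstance(a, int) and isinstance(b, int):
--             return 0, a, b
--         r = explode(a, d + 1)
--         if r is not None:
--             a2, la, ra = r
--             if ra is not None:
--                 b = add_leftmost(b, ra)
--                 ra = None
--             return (a2, b), la, ra
--         r = explode(b, d + 1)
--         if r is not None:
--             b2, la, ra = r
--             if la is not None: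
--                 a = add_rightmost(a, la)
--                 la = None
--             return (a, b2), la, ra
--         return None
--
--     def split(t):
--         if isinstance(t, int):
--             if t >= 10:
--                 return (t // 2, (t + 1) // 2)
--             return None
--         s = split(t[0])
--         if s is not None:
--             return (s, t[1])
--         s = split(t[1])
--         if s is not None:
--             return (t[0], s)
--         return None
--
--     def ser(t):
--         if isinstance(t, int):
--             return str(t)
--         return '[' + ser(t[0]) + ',' + ser(t[1]) + ']'
--
--     try:
--         t, end = parse(expr, 0)
--         assert end == len(expr)
--     except (AssertionError, IndexError):
--         return expr
--     while True:
--         r = explode(t, 0)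
--         if r is not None:
--             t = r[0]
--             continue
--         s = split(t)
--         if s is None:
--             break
--         t = s
--     return ser(t)
-- ===== Notes on version B (the rewrite author's own statement) =====
-- stated objective: alternative
-- what changed: Replaces A's repeated index scans and list splicing over a flat character/token list with parsing the input into a nested pair tree that is reduced by recursive explode/split passes and serialized back.
-- outside the precondition, e.g. on reduce_expr('[[[[[1,2]]]]]'): A returns '[[[[0]]]]', B returns '[[[[[1,2]]]]]'
import Mathlib
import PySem

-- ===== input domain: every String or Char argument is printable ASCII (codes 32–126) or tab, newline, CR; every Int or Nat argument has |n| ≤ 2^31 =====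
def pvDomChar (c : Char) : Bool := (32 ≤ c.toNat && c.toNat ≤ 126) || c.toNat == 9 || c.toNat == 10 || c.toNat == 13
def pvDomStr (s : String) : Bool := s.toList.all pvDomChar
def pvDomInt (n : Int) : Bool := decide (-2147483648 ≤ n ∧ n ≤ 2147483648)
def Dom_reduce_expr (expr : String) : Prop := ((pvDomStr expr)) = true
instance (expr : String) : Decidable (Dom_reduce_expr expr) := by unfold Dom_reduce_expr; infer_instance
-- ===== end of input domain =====

-- B re-implements the snailfish reduction on a parsed pair tree (recursive explode/split)
-- instead of A's repeated index scans over a flat token list; return values agree on all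
-- well-formed single-digit snailfish strings of bracket depth ≤ 5 (Pre_ below).

-- ===== PORT A =====
-- int(s): A only applies int() to nonempty all-digit tokens produced by str();
-- on those pvDigits is exactly Python's int().
def pvDigits (cs : List Char) : Int :=
  cs.foldl (fun acc c => 10 * acc + ((c.toNat : Int) - 48)) 0

def pvPyInt (s : String) : Int := pvDigits s.toList

-- the 'for i in range(len(l))' explode-scan, as a recursion over the suffix of l
-- still to be visited (l[i+4] is the suffix's element 4); returns Python's final i.
def pvScanE : List String → List Int → Int → Int
  | [], _, i => i - 1
  | c :: rest, a, i =>
    let a' := if c = "[" then a ++ [i] else if c = "]" then a.dropLast else a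
    if a'.length = 5 && (PySem.List.pyGet? (c :: rest) 4 == some "]") then i
    else pvScanE rest a' (i + 1)

-- the 'for k in range(len(l))' two-digit scan; returns Python's final k.
def pvScanK : List String → Int → Int
  | [], k => k - 1
  | c :: rest, k => if 1 < PySem.Str.len c then k else pvScanK rest (k + 1)

-- the 'for w in range(i+5, len(l))' digit scan over l[i+5:]; returns Python's final w.
def pvScanW : List String → Int → Int
  | [], w => w - 1
  | c :: rest, w => if PySem.Str.strIsdigit c then w else pvScanW rest (w + 1)

-- the 'for q in range(i-1, -1, -1)' digit scan over l[:i] reversed; returns Python's final q.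
def pvScanQ : List String → Int → Int
  | [], q => q + 1
  | c :: rest, q => if PySem.Str.strIsdigit c then q else pvScanQ rest (q - 1)

-- one pass of the 'while True' body; none = the final 'break'
def pvStepA (l : List String) : Option (List String) :=
  let n : Int := l.length
  let i := pvScanE l [] 0
  let k := pvScanK l 0
  if i ≠ n - 1 then
    let num0 := pvPyInt (PySem.List.pyGetD l (i + 1) "")
    let num1 := pvPyInt (PySem.List.pyGetD l (i + 3) "")
    let w := pvScanW (PySem.List.slice l (some (i + 5)) none) (i + 5)
    let l1 := if w ≠ n - 1 then
        PySem.List.pySetD l w (PySem.Int.toStr (pvPyInt (PySem.List.pyGetD l w "") + num1))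
      else l
    let q := pvScanQ (PySem.List.slice l1 none (some i)).reverse (i - 1)
    let l2 := if q ≠ 0 then
        PySem.List.pySetD l1 q (PySem.Int.toStr (pvPyInt (PySem.List.pyGetD l1 q "") + num0))
      else l1
    some (PySem.List.slice l2 none (some i) ++ ["0"] ++ PySem.List.slice l2 (some (i + 5)) none)
  else if k ≠ n - 1 then
    let v := pvPyInt (PySem.List.pyGetD l k "")
    some (PySem.List.slice l none (some k) ++
      ["[", PySem.Int.toStr (PySem.Int.floordiv v 2), ",",
       PySem.Int.toStr (PySem.Int.floordiv (v + 1) 2), "]"] ++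
      PySem.List.slice l (some (k + 1)) none)
  else none

-- 'while True': fuel only bounds the iteration count, the loop stops at pvStepA = none
def pvLoopA : Nat → List String → List String
  | 0, l => l
  | fuel + 1, l =>
    match pvStepA l with
    | some l' => pvLoopA fuel l'
    | none => l

def reduce_expr (expr : String) : String :=
  let l := expr.toList.map (fun c => String.ofList [c])   -- l = list(expr)
  PySem.Str.join "" (pvLoopA (1000 + 1000 * l.length) l)

-- ===== PORT B =====
inductive SF where
  | leaf : Int → SF
  | pair : SF → SF → SF
deriving DecidableEq, Repr

def SF.isLeaf : SF → Bool
  | .leaf _ => true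
  | .pair _ _ => false

def SF.val : SF → Int
  | .leaf n => n
  | .pair _ _ => 0

-- Source B's parse(s, i), recursing on the remaining characters instead of an index
-- (fuel bounds the recursion depth; length+1 always suffices); none = parse error
-- (Source B's AssertionError/IndexError).  int(s[i]) on the single digit is pvDigits [c].
def pvParse : Nat → List Char → Option (SF × List Char)
  | 0, _ => none
  | _ + 1, [] => none
  | fuel + 1, c :: rest =>
    if c = '[' then
      match pvParse fuel rest with
      | some (lft, ',' :: r2) =>
        match pvParse fuel r2 with
        | some (rgt, ']' :: r3) => some (.pair lft rgt, r3)
        | _ => none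
      | _ => none
    else
      if PySem.Chars.isdigit c then some (.leaf (pvDigits [c]), rest) else none

def pvAddL : SF → Int → SF
  | .leaf n, v => .leaf (n + v)
  | .pair a b, v => .pair (pvAddL a v) b

def pvAddR : SF → Int → SF
  | .leaf n, v => .leaf (n + v)
  | .pair a b, v => .pair a (pvAddR b v)

-- Source B's explode(t, d): (new subtree, pending left add, pending right add)
def pvExpl (d : Nat) : SF → Option (SF × Option Int × Option Int)
  | .leaf _ => none
  | .pair a b =>
    if 4 ≤ d ∧ a.isLeaf = true ∧ b.isLeaf = true then
      some (.leaf 0, some a.val, some b.val)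
    else
      match pvExpl (d + 1) a with
      | some (a2, la, ra) =>
        match ra with
        | some v => some (.pair a2 (pvAddL b v), la, none)
        | none => some (.pair a2 b, la, none)
      | none =>
        match pvExpl (d + 1) b with
        | some (b2, la, ra) =>
          match la with
          | some v => some (.pair (pvAddR a v) b2, none, ra)
          | none => some (.pair a b2, none, ra)
        | none => none

-- Source B's split(t)
def pvSplit : SF → Option SF
  | .leaf n =>
    if 10 ≤ n then
      some (.pair (.leaf (PySem.Int.floordiv n 2)) (.leaf (PySem.Int.floordiv (n + 1) 2)))
    else none
  | .pair a b =>
    match pvSplit a with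
    | some a2 => some (.pair a2 b)
    | none =>
      match pvSplit b with
      | some b2 => some (.pair a b2)
      | none => none

-- Source B's ser(t), building the character list of the result string
def pvSer : SF → List Char
  | .leaf n => PySem.Int.toChars n
  | .pair a b => '[' :: (pvSer a ++ ',' :: (pvSer b ++ [']']))

-- Source B's 'while True' reduction loop (same fuel bound as port A; stops when neither applies)
def pvLoopB : Nat → SF → SF
  | 0, t => t
  | fuel + 1, t =>
    match pvExpl 0 t with
    | some (t2, _, _) => pvLoopB fuel t2
    | none =>
      match pvSplit t with
      | some t2 => pvLoopB fuel t2
      | none => t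

def reduce_expr_alt (expr : String) : String :=
  match pvParse (expr.toList.length + 1) expr.toList with
  | some (t, []) => String.ofList (pvSer (pvLoopB (1000 + 1000 * expr.toList.length) t))
  | _ => expr   -- Source B's except-branch: a string that does not parse is returned unchanged

-- ===== PRECONDITION & SPEC =====
-- Pre_ admits non-empty strings that are either (a) well-formed snailfish expressions
-- with single-digit literals and bracket depth ≤ 5, or (b) bracket-inert: never nested
-- 5 deep and never closing an unopened bracket, so A's scans find nothing and A returns
-- the string unchanged.  Excluded are the strings on which A raises (unmatched ']',
-- scans running off the end, int() on junk) and the remaining corner — bracket-heavy or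
-- deeper-than-5 malformed strings — where A returns an accidental partial result of its
-- character surgery while B reduces the parsed tree properly or returns the input
-- unchanged.
-- pvPreStep is a one-pass stack machine for (a): the stack holds the symbols still
-- expected ('E' = an expression), and a '[' is only admitted while fewer than 5
-- pairs are open (the stack's ']' count is the current depth).
def pvPreStep : Option (List Char) → Char → Option (List Char)
  | none, _ => none
  | some [], _ => none
  | some (e :: st), c =>
    if e = 'E' then
      if PySem.Chars.isdigit c then some st
      else if c = '[' ∧ st.count ']' < 5 then some ('E' :: ',' :: 'E' :: ']' :: st)
      else none
    else if c = e then some st else none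

-- pvInertStep tracks the bracket depth for (b); none = a disqualifying character.
def pvInertStep : Option Nat → Char → Option Nat
  | none, _ => none
  | some d, c =>
    if c = '[' then (if d + 1 ≤ 4 then some (d + 1) else none)
    else if c = ']' then (if d = 0 then none else some (d - 1))
    else some d

def Pre_reduce_expr (expr : String) : Prop :=
  expr.toList ≠ [] ∧
    ((expr.toList.foldl pvInertStep (some 0)).isSome = true ∨
      expr.toList.foldl pvPreStep (some ['E']) = some [])

instance (expr : String) : Decidable (Pre_reduce_expr expr) := by
  unfold Pre_reduce_expr; infer_instance

def pvWitness_reduce_expr : String := "[[[[[9,8],1],2],3],4]"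

def Spec_reduce_expr (expr : String) (out : String) : Prop := out = reduce_expr_alt expr
instance (expr : String) (out : String) : Decidable (Spec_reduce_expr expr out) := by
  unfold Spec_reduce_expr; infer_instance

-- ===== CLAIM (what is proved, stated in full; the proofs are below) =====
def Claim_equal_reduce_expr : Prop :=
  ∀ (expr : String), Dom_reduce_expr expr → Pre_reduce_expr expr →
    Spec_reduce_expr expr (reduce_expr expr)


-- ===== LEMMAS AND PROOFS =====

-- ---- digits / str(n) facts ----
theorem pvFoldlDigits_append (l1 l2 : List Char) (a : Int) :
    (l1 ++ l2).foldl (fun acc c => 10 * acc + ((c.toNat : Int) - 48)) a =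
      l2.foldl (fun acc c => 10 * acc + ((c.toNat : Int) - 48))
        (l1.foldl (fun acc c => 10 * acc + ((c.toNat : Int) - 48)) a) :=
  List.foldl_append

theorem pvDigitCharVal (k : Nat) (h : k < 10) :
    ((Nat.digitChar k).toNat : Int) - 48 = (k : Int) := by
  interval_cases k <;> decide

theorem pvDigits_toDigits (m : Nat) : pvDigits (Nat.toDigits 10 m) = (m : Int) := by
  induction m using Nat.strong_induction_on with
  | _ m ih =>
    by_cases h : m < 10
    · rw [Nat.toDigits_of_lt_base h]
      simp [pvDigits, pvDigitCharVal m h]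
    · rw [Nat.toDigits_eq_if (by norm_num)]
      simp only [if_neg h]
      have h10 : m / 10 < m := Nat.div_lt_self (by omega) (by norm_num)
      have := ih (m / 10) h10
      simp only [pvDigits] at this ⊢
      rw [pvFoldlDigits_append]
      simp [this, pvDigitCharVal (m % 10) (Nat.mod_lt _ (by norm_num))]
      omega

theorem pvToChars_nonneg (n : Int) (h : 0 ≤ n) :
    PySem.Int.toChars n = Nat.toDigits 10 n.toNat := by
  simp [PySem.Int.toChars, not_lt.mpr h]

theorem pvRound (n : Int) (h : 0 ≤ n) : pvPyInt (PySem.Int.toStr n) = n := by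
  rw [pvPyInt, PySem.Int.toList_toStr, pvToChars_nonneg n h, pvDigits_toDigits]
  omega

theorem pvIsdig (n : Int) (h : 0 ≤ n) : PySem.Str.strIsdigit (PySem.Int.toStr n) = true := by
  simp [PySem.Str.strIsdigit, PySem.Int.toList_toStr, pvToChars_nonneg n h,
        PySem.Chars.strIsdigit]
  constructor
  · have := @Nat.length_toDigits_pos 10 n.toNat
    intro hc; rw [hc] at this; simp at this
  · intro c hc
    have hd := Nat.isDigit_of_mem_toDigits (by norm_num) (by norm_num) hc
    simp [Char.isDigit] at hd
    simp [PySem.Chars.isdigit]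
    exact ⟨Char.le_def.mpr hd.1, Char.le_def.mpr hd.2⟩

theorem pvLen1 (n : Int) (h0 : 0 ≤ n) (h9 : n ≤ 9) : PySem.Str.len (PySem.Int.toStr n) = 1 := by
  rw [PySem.Str.len_eq, PySem.Int.toList_toStr, pvToChars_nonneg n h0,
      Nat.toDigits_of_lt_base (by omega)]
  rfl

theorem pvLenBig (n : Int) (h : 10 ≤ n) : 1 < PySem.Str.len (PySem.Int.toStr n) := by
  rw [PySem.Str.len_eq, PySem.Int.toList_toStr, pvToChars_nonneg n (by omega)]
  have : ¬ ((Nat.toDigits 10 n.toNat).length ≤ 1) := by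
    rw [Nat.length_toDigits_le_iff (by norm_num) (by norm_num)]
    omega
  omega

theorem pvDigitBounds (c : Char) (h : PySem.Chars.isdigit c = true) :
    48 ≤ c.toNat ∧ c.toNat ≤ 57 := by
  simp [PySem.Chars.isdigit, Char.le_def, UInt32.le_iff_toNat_le] at h
  exact h

theorem pvDigitCharChar (c : Char) (h : PySem.Chars.isdigit c = true) :
    Nat.digitChar (c.toNat - 48) = c := by
  obtain ⟨g1, g2⟩ := pvDigitBounds c h
  have hc : c = Char.ofNat c.toNat := (Char.ofNat_toNat c).symm
  interval_cases h : c.toNat <;> rw [hc] <;> rfl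

theorem pvToChars_digit (c : Char) (h : PySem.Chars.isdigit c = true) :
    PySem.Int.toChars ((c.toNat : Int) - 48) = [c] := by
  obtain ⟨g1, g2⟩ := pvDigitBounds c h
  rw [pvToChars_nonneg _ (by omega), show ((c.toNat : Int) - 48).toNat = c.toNat - 48 by omega,
      Nat.toDigits_of_lt_base (by omega), pvDigitCharChar c h]

theorem pvTokNeBrk (n : Int) (h : 0 ≤ n) :
    PySem.Int.toStr n ≠ "[" ∧ PySem.Int.toStr n ≠ "]" ∧ PySem.Int.toStr n ≠ "," := by
  have hd := pvIsdig n h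
  refine ⟨?_, ?_, ?_⟩ <;> intro hc <;> rw [hc] at hd <;> exact absurd hd (by decide)



-- ---- proof-side tree/token helpers ----
def pvToks : SF → List String
  | .leaf n => [PySem.Int.toStr n]
  | .pair a b => "[" :: (pvToks a ++ "," :: (pvToks b ++ ["]"]))

def pvVld : Nat → SF → Prop
  | _, .leaf n => 0 ≤ n
  | d, .pair a b => d + 1 ≤ 5 ∧ pvVld (d + 1) a ∧ pvVld (d + 1) b

def pvHasDig (l : List String) : Bool := l.any (fun s => PySem.Str.strIsdigit s)

def pvRAddT (v : Int) : List String → List String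
  | [] => []
  | s :: rest => if PySem.Str.strIsdigit s then PySem.Int.toStr (pvPyInt s + v) :: rest
                 else s :: pvRAddT v rest

def pvLAddT (v : Int) (l : List String) : List String := (pvRAddT v l.reverse).reverse

theorem pvHasDig_nil : pvHasDig [] = false := rfl

theorem pvHasDig_cons (x : String) (xs : List String) :
    pvHasDig (x :: xs) = (PySem.Str.strIsdigit x || pvHasDig xs) := rfl

theorem pvHasDig_append (p q : List String) :
    pvHasDig (p ++ q) = (pvHasDig p || pvHasDig q) := by
  simp [pvHasDig]

theorem pvHasDig_reverse (l : List String) : pvHasDig l.reverse = pvHasDig l := by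
  simp [pvHasDig]

theorem pvNotTrue {b : Bool} (h : b = false) : ¬ b = true := by simp [h]

theorem pvHasDig_toks (t : SF) (d : Nat) (h : pvVld d t) : pvHasDig (pvToks t) = true := by
  induction t generalizing d with
  | leaf n => rw [pvToks, pvHasDig_cons, pvIsdig n h, Bool.true_or]
  | pair a b iha ihb =>
    obtain ⟨-, ha, -⟩ := h
    rw [pvToks, pvHasDig_cons, pvHasDig_append, iha (d + 1) ha]
    simp

theorem pvToks_pair_eq_concat (a b : SF) :
    pvToks (.pair a b) = ("[" :: (pvToks a ++ "," :: pvToks b)) ++ ["]"] := by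
  simp [pvToks]

theorem pvRAddT_nodig (v : Int) (p q : List String) (h : pvHasDig p = false) :
    pvRAddT v (p ++ q) = p ++ pvRAddT v q := by
  induction p with
  | nil => simp
  | cons s rest ih =>
    rw [pvHasDig_cons, Bool.or_eq_false_iff] at h
    rw [List.cons_append, pvRAddT, if_neg (pvNotTrue h.1)]
    simp [ih h.2]

theorem pvRAddT_dig (v : Int) (p q : List String) (h : pvHasDig p = true) :
    pvRAddT v (p ++ q) = pvRAddT v p ++ q := by
  induction p with
  | nil => exact absurd h (by simp [pvHasDig_nil])
  | cons s rest ih =>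
    by_cases hs : PySem.Str.strIsdigit s = true
    · rw [List.cons_append, pvRAddT, if_pos hs, pvRAddT, if_pos hs, List.cons_append]
    · rw [pvHasDig_cons, Bool.or_eq_true_iff] at h
      have hr : pvHasDig rest = true := by
        rcases h with h | h
        · exact absurd h hs
        · exact h
      rw [List.cons_append, pvRAddT, if_neg hs, pvRAddT, if_neg hs, ih hr, List.cons_append]

theorem pvLen_pvRAddT (v : Int) (l : List String) : (pvRAddT v l).length = l.length := by
  induction l with
  | nil => rfl
  | cons s rest ih =>
    by_cases hs : PySem.Str.strIsdigit s = true
    · rw [pvRAddT, if_pos hs]; simp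
    · rw [pvRAddT, if_neg hs]; simp [ih]

theorem pvLen_pvLAddT (v : Int) (l : List String) : (pvLAddT v l).length = l.length := by
  simp [pvLAddT, pvLen_pvRAddT]

theorem pvLAddT_nodig (v : Int) (p q : List String) (h : pvHasDig q = false) :
    pvLAddT v (p ++ q) = pvLAddT v p ++ q := by
  simp only [pvLAddT, List.reverse_append]
  rw [pvRAddT_nodig v q.reverse p.reverse (by rw [pvHasDig_reverse]; exact h)]
  simp

theorem pvLAddT_dig (v : Int) (p q : List String) (h : pvHasDig q = true) :
    pvLAddT v (p ++ q) = p ++ pvLAddT v q := by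
  simp only [pvLAddT, List.reverse_append]
  rw [pvRAddT_dig v q.reverse p.reverse (by rw [pvHasDig_reverse]; exact h)]
  simp

theorem pvRAddT_toks (v : Int) (t : SF) (d : Nat) (h : pvVld d t) (q : List String) :
    pvRAddT v (pvToks t ++ q) = pvToks (pvAddL t v) ++ q := by
  induction t generalizing d q with
  | leaf n =>
    simp only [pvToks, pvAddL, List.cons_append, List.nil_append, pvRAddT,
               if_pos (pvIsdig n h), pvRound n h]
  | pair a b iha ihb =>
    obtain ⟨-, ha, -⟩ := h
    simp only [pvToks, pvAddL, List.cons_append, pvRAddT, if_neg (by decide : ¬ PySem.Str.strIsdigit "[" = true)]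
    rw [List.append_assoc, iha (d + 1) ha]
    simp

theorem pvLAddT_toks (v : Int) (t : SF) (d : Nat) (h : pvVld d t) (p : List String) :
    pvLAddT v (p ++ pvToks t) = p ++ pvToks (pvAddR t v) := by
  induction t generalizing d p with
  | leaf n =>
    show pvLAddT v (p ++ [PySem.Int.toStr n]) = p ++ pvToks (.leaf (n + v))
    simp only [pvLAddT, List.reverse_append, List.reverse_cons, List.reverse_nil,
               List.nil_append, List.singleton_append, pvRAddT, if_pos (pvIsdig n h),
               pvRound n h]
    simp [pvToks]
  | pair a b iha ihb =>
    obtain ⟨-, -, hbb⟩ := h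
    simp only [pvToks, pvAddR]
    calc pvLAddT v (p ++ "[" :: (pvToks a ++ "," :: (pvToks b ++ ["]"])))
        = pvLAddT v ((p ++ "[" :: pvToks a ++ [","] ++ pvToks b) ++ ["]"]) := by
          simp [List.append_assoc]
      _ = pvLAddT v ((p ++ "[" :: pvToks a ++ [","]) ++ pvToks b) ++ ["]"] := by
          rw [pvLAddT_nodig v _ _ (by decide)]
      _ = ((p ++ "[" :: pvToks a ++ [","]) ++ pvToks (pvAddR b v)) ++ ["]"] := by
          rw [ihb (d + 1) hbb]
      _ = p ++ "[" :: (pvToks a ++ "," :: (pvToks (pvAddR b v) ++ ["]"])) := by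
          simp [List.append_assoc]

-- ---- scan lemmas ----
theorem pvScanW_found (p : List String) (s : String) (r : List String) (w0 : Int)
    (hp : pvHasDig p = false) (hs : PySem.Str.strIsdigit s = true) :
    pvScanW (p ++ s :: r) w0 = w0 + p.length := by
  induction p generalizing w0 with
  | nil => rw [List.nil_append, pvScanW, if_pos hs]; simp
  | cons x rest ih =>
    rw [pvHasDig_cons, Bool.or_eq_false_iff] at hp
    rw [List.cons_append, pvScanW, if_neg (pvNotTrue hp.1), ih (w0 + 1) hp.2]
    simp only [List.length_cons]; push_cast; ring

theorem pvScanW_none (l : List String) (w0 : Int) (h : pvHasDig l = false) :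
    pvScanW l w0 = w0 + l.length - 1 := by
  induction l generalizing w0 with
  | nil => simp [pvScanW]
  | cons x rest ih =>
    rw [pvHasDig_cons, Bool.or_eq_false_iff] at h
    rw [pvScanW, if_neg (pvNotTrue h.1), ih (w0 + 1) h.2]
    simp only [List.length_cons]; push_cast; ring

theorem pvScanQ_found (p : List String) (s : String) (r : List String) (q0 : Int)
    (hp : pvHasDig p = false) (hs : PySem.Str.strIsdigit s = true) :
    pvScanQ (p ++ s :: r) q0 = q0 - p.length := by
  induction p generalizing q0 with
  | nil => rw [List.nil_append, pvScanQ, if_pos hs]; simp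
  | cons x rest ih =>
    rw [pvHasDig_cons, Bool.or_eq_false_iff] at hp
    rw [List.cons_append, pvScanQ, if_neg (pvNotTrue hp.1), ih (q0 - 1) hp.2]
    simp only [List.length_cons]; push_cast; ring

theorem pvScanQ_none (l : List String) (q0 : Int) (h : pvHasDig l = false) :
    pvScanQ l q0 = q0 - l.length + 1 := by
  induction l generalizing q0 with
  | nil => simp [pvScanQ]
  | cons x rest ih =>
    rw [pvHasDig_cons, Bool.or_eq_false_iff] at h
    rw [pvScanQ, if_neg (pvNotTrue h.1), ih (q0 - 1) h.2]
    simp only [List.length_cons]; push_cast; ring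

theorem pvScanK_found (p : List String) (s : String) (r : List String) (k0 : Int)
    (hp : ∀ x ∈ p, PySem.Str.len x = 1) (hs : 1 < PySem.Str.len s) :
    pvScanK (p ++ s :: r) k0 = k0 + p.length := by
  induction p generalizing k0 with
  | nil => rw [List.nil_append, pvScanK, if_pos hs]; simp
  | cons x rest ih =>
    have hx := hp x (by simp)
    rw [List.cons_append, pvScanK, if_neg (by rw [hx]; norm_num),
        ih (k0 + 1) (fun y hy => hp y (by simp [hy]))]
    simp only [List.length_cons]; push_cast; ring

theorem pvScanK_none (l : List String) (k0 : Int) (h : ∀ x ∈ l, PySem.Str.len x = 1) :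
    pvScanK l k0 = k0 + l.length - 1 := by
  induction l generalizing k0 with
  | nil => simp [pvScanK]
  | cons x rest ih =>
    have hx := h x (by simp)
    rw [pvScanK, if_neg (by rw [hx]; norm_num), ih (k0 + 1) (fun y hy => h y (by simp [hy]))]
    simp only [List.length_cons]; push_cast; ring

theorem pvFirstDig (l : List String) (h : pvHasDig l = true) :
    ∃ p s r, l = p ++ s :: r ∧ pvHasDig p = false ∧ PySem.Str.strIsdigit s = true := by
  induction l with
  | nil => exact absurd h (by simp [pvHasDig_nil])
  | cons x rest ih =>
    by_cases hx : PySem.Str.strIsdigit x = true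
    · exact ⟨[], x, rest, by simp, pvHasDig_nil, hx⟩
    · rw [pvHasDig_cons, Bool.or_eq_true_iff] at h
      have hr : pvHasDig rest = true := by
        rcases h with h | h
        · exact absurd h hx
        · exact h
      obtain ⟨p, s, r, h1, h2, h3⟩ := ih hr
      refine ⟨x :: p, s, r, by simp [h1], ?_, h3⟩
      rw [pvHasDig_cons, h2, Bool.or_false, Bool.eq_false_iff]
      exact hx

theorem pvLastDig (l : List String) (h : pvHasDig l = true) :
    ∃ p s r, l = p ++ s :: r ∧ pvHasDig r = false ∧ PySem.Str.strIsdigit s = true := by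
  obtain ⟨p, s, r, h1, h2, h3⟩ := pvFirstDig l.reverse (by rw [pvHasDig_reverse]; exact h)
  refine ⟨r.reverse, s, p.reverse, ?_, by rw [pvHasDig_reverse]; exact h2, h3⟩
  have := congrArg List.reverse h1
  simpa using this

theorem pvRAddT_decomp (v : Int) (p : List String) (s : String) (r : List String)
    (hp : pvHasDig p = false) (hs : PySem.Str.strIsdigit s = true) :
    pvRAddT v (p ++ s :: r) = p ++ PySem.Int.toStr (pvPyInt s + v) :: r := by
  rw [pvRAddT_nodig v p _ hp, pvRAddT, if_pos hs]

theorem pvLAddT_decomp (v : Int) (p : List String) (s : String) (r : List String)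
    (hr : pvHasDig r = false) (hs : PySem.Str.strIsdigit s = true) :
    pvLAddT v (p ++ s :: r) = p ++ PySem.Int.toStr (pvPyInt s + v) :: r := by
  show pvLAddT v (p ++ (s :: r)) = _
  rw [pvLAddT_dig v p _ (by rw [pvHasDig_cons, hs, Bool.true_or])]
  simp only [pvLAddT, List.reverse_cons]
  rw [pvRAddT_nodig v r.reverse [s] (by rw [pvHasDig_reverse]; exact hr), pvRAddT, if_pos hs]
  simp

-- ---- validity helpers ----
theorem pvVld_leaf5 (u v : SF) (h : pvVld 4 (.pair u v)) :
    u.isLeaf = true ∧ v.isLeaf = true := by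
  obtain ⟨-, hu, hv⟩ := h
  constructor
  · cases u with
    | leaf n => rfl
    | pair a b => exact absurd hu.1 (by omega)
  · cases v with
    | leaf n => rfl
    | pair a b => exact absurd hv.1 (by omega)

theorem pvVld_addL (t : SF) (d : Nat) (v : Int) (hv : pvVld d t) (h0 : 0 ≤ v) :
    pvVld d (pvAddL t v) := by
  induction t generalizing d with
  | leaf n => exact add_nonneg hv h0
  | pair a b iha ihb => exact ⟨hv.1, iha (d + 1) hv.2.1, hv.2.2⟩

theorem pvVld_addR (t : SF) (d : Nat) (v : Int) (hv : pvVld d t) (h0 : 0 ≤ v) :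
    pvVld d (pvAddR t v) := by
  induction t generalizing d with
  | leaf n => exact add_nonneg hv h0
  | pair a b iha ihb => exact ⟨hv.1, hv.2.1, ihb (d + 1) hv.2.2⟩

-- ---- pvScanE stepping ----
theorem pvScanE_step_other (c : String) (a : List Int) (i : Int) (rest : List String)
    (hc1 : c ≠ "[") (hc2 : c ≠ "]") (h5 : a.length ≠ 5) :
    pvScanE (c :: rest) a i = pvScanE rest a (i + 1) := by
  rw [pvScanE]
  simp [hc1, hc2, h5]

theorem pvScanE_step_open (a : List Int) (i : Int) (rest : List String)
    (h5 : a.length + 1 ≠ 5) :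
    pvScanE ("[" :: rest) a i = pvScanE rest (a ++ [i]) (i + 1) := by
  rw [pvScanE]
  simp [h5]

theorem pvScanE_step_close (a : List Int) (i : Int) (rest : List String)
    (h5 : a.dropLast.length ≠ 5) :
    pvScanE ("]" :: rest) a i = pvScanE rest a.dropLast (i + 1) := by
  rw [pvScanE]
  simp [h5]
  intro h6 _
  exact absurd (by simp [h6] : a.dropLast.length = 5) h5

theorem pvScanE_break (a : List Int) (i : Int) (s1 s2 s3 : String) (rest : List String)
    (h5 : a.length + 1 = 5) :
    pvScanE ("[" :: s1 :: s2 :: s3 :: "]" :: rest) a i = i := by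
  rw [pvScanE]
  rw [if_pos]
  simp [h5]
  rw [show (4 : Int) = ((4 : Nat) : Int) by norm_num, PySem.List.pyGet?_natCast]
  simp

-- pvExpl d t = none destructors
theorem pvExpl_none_pair (u v : SF) (d : Nat) (hd : d ≤ 3)
    (h : pvExpl d (.pair u v) = none) :
    pvExpl (d + 1) u = none ∧ pvExpl (d + 1) v = none := by
  rw [pvExpl, if_neg (by rintro ⟨h4, -⟩; omega)] at h
  cases hu : pvExpl (d + 1) u with
  | some r =>
    obtain ⟨a2, la, ra⟩ := r
    rw [hu] at h
    cases ra <;> simp at h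
  | none =>
    rw [hu] at h
    cases hv : pvExpl (d + 1) v with
    | some r =>
      obtain ⟨b2, la, ra⟩ := r
      rw [hv] at h
      cases la <;> simp at h
    | none => exact ⟨rfl, rfl⟩

-- pass-through: scanning the tokens of an explode-free subtree leaves the stack as it was
theorem pvScanE_pass (t : SF) (d : Nat) (hv : pvVld d t) (hE : pvExpl d t = none)
    (hd : d ≤ 4) (a : List Int) (i : Int) (rest : List String) (ha : a.length = d) :
    pvScanE (pvToks t ++ rest) a i = pvScanE rest a (i + (pvToks t).length) := by
  induction t generalizing d a i rest with
  | leaf n =>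
    rw [pvToks, List.cons_append, List.nil_append,
        pvScanE_step_other _ _ _ _ (pvTokNeBrk n hv).1 (pvTokNeBrk n hv).2.1 (by omega)]
    simp [pvToks]
  | pair u v iha ihv =>
    have hd3 : d ≤ 3 := by
      rcases Nat.lt_or_ge d 4 with h | h
      · omega
      · exfalso
        have hd4 : d = 4 := by omega
        subst hd4
        obtain ⟨hu, hv2⟩ := pvVld_leaf5 u v hv
        rw [pvExpl, if_pos ⟨by omega, hu, hv2⟩] at hE
        exact absurd hE (by simp)
    obtain ⟨hEu, hEv⟩ := pvExpl_none_pair u v d hd3 hE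
    obtain ⟨-, hvu, hvv⟩ := hv
    rw [pvToks]
    have hshape : ("[" :: (pvToks u ++ "," :: (pvToks v ++ ["]"]))) ++ rest
        = "[" :: (pvToks u ++ ("," :: (pvToks v ++ ("]" :: rest)))) := by simp
    rw [hshape, pvScanE_step_open a i _ (by omega)]
    rw [iha (d + 1) hvu hEu (by omega) (a ++ [i]) (i + 1) _ (by simp [ha])]
    rw [pvScanE_step_other "," _ _ _ (by decide) (by decide) (by simp [ha]; omega)]
    rw [ihv (d + 1) hvv hEv (by omega) (a ++ [i]) _ _ (by simp [ha])]
    rw [pvScanE_step_close (a ++ [i]) _ rest (by simp [ha]; omega)]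
    have hdrop : (a ++ [i]).dropLast = a := by simp
    rw [hdrop]
    congr 1
    simp [pvToks]
    push_cast
    ring

-- ---- explode characterization ----
theorem pvExpl_char (t : SF) (d : Nat) (hv : pvVld d t) (hd : d ≤ 4)
    (t2 : SF) (oL oR : Option Int) (hE : pvExpl d t = some (t2, oL, oR)) :
    ∃ (x y : Int) (pre post : List String),
      0 ≤ x ∧ 0 ≤ y ∧
      pvToks t = pre ++ "[" :: PySem.Int.toStr x :: "," :: PySem.Int.toStr y :: "]" :: post ∧
      (∀ (a : List Int) (i : Int) (rest : List String), a.length = d →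
         pvScanE (pvToks t ++ rest) a i = i + pre.length) ∧
      pvToks t2 = (if pvHasDig pre then pvLAddT x pre else pre) ++ "0" ::
                  (if pvHasDig post then pvRAddT y post else post) ∧
      oL = (if pvHasDig pre then none else some x) ∧
      oR = (if pvHasDig post then none else some y) ∧
      (d ≤ 3 → (∃ pre1, pre = "[" :: pre1) ∧ (∃ post1, post = post1 ++ ["]"])) := by
  induction t generalizing d t2 oL oR with
  | leaf n => exact absurd hE (by simp [pvExpl])
  | pair u w iha ihw =>
    by_cases hguard : 4 ≤ d ∧ u.isLeaf = true ∧ w.isLeaf = true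
    · -- the exploding pair itself
      rw [pvExpl, if_pos hguard] at hE
      simp only [Option.some.injEq, Prod.mk.injEq] at hE
      obtain ⟨h1, h2, h3⟩ := hE
      obtain ⟨x, rfl⟩ : ∃ x, u = SF.leaf x := by
        cases u with
        | leaf n => exact ⟨n, rfl⟩
        | pair a b => exact absurd hguard.2.1 (by simp [SF.isLeaf])
      obtain ⟨y, rfl⟩ : ∃ y, w = SF.leaf y := by
        cases w with
        | leaf n => exact ⟨n, rfl⟩
        | pair a b => exact absurd hguard.2.2 (by simp [SF.isLeaf])
      have hd4 : d = 4 := by omega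
      refine ⟨x, y, [], [], hv.2.1, hv.2.2, by simp [pvToks, SF.val], ?_, ?_, ?_, ?_, ?_⟩
      · intro a i rest ha
        have hsh : pvToks (SF.pair (SF.leaf x) (SF.leaf y)) ++ rest
            = "[" :: PySem.Int.toStr x :: "," :: PySem.Int.toStr y :: "]" :: rest := by
          simp [pvToks]
        rw [hsh, pvScanE_break a i _ _ _ rest (by omega)]
        simp
      · rw [← h1]
        simp [pvHasDig_nil, pvToks]
        decide
      · rw [← h2]; simp [pvHasDig_nil, SF.val]
      · rw [← h3]; simp [pvHasDig_nil, SF.val]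
      · intro hle; omega
    · -- explode strictly inside
      have hd3 : d ≤ 3 := by
        rcases Nat.lt_or_ge d 4 with h | h
        · omega
        · exfalso
          have hd4 : d = 4 := by omega
          subst hd4
          obtain ⟨h1, h2⟩ := pvVld_leaf5 u w hv
          exact hguard ⟨by omega, h1, h2⟩
      obtain ⟨-, hvu, hvw⟩ := hv
      rw [pvExpl, if_neg hguard] at hE
      cases hu : pvExpl (d + 1) u with
      | some r =>
        obtain ⟨u2, la, ra⟩ := r
        rw [hu] at hE
        obtain ⟨x, y, preU, postU, hx0, hy0, htok, hscan, htok2, hoL, hoR, -⟩ :=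
          iha (d + 1) hvu (by omega) u2 la ra hu
        have hpreEq : pvHasDig ("[" :: preU) = pvHasDig preU := by
          rw [pvHasDig_cons, (by decide : PySem.Str.strIsdigit "[" = false)]; simp
        have hpostDig : pvHasDig (postU ++ ("," :: (pvToks w ++ ["]"]))) = true := by
          rw [pvHasDig_append, pvHasDig_cons, pvHasDig_append, pvHasDig_toks w (d + 1) hvw]
          simp
        refine ⟨x, y, "[" :: preU, postU ++ ("," :: (pvToks w ++ ["]"])), hx0, hy0, ?_, ?_, ?_, ?_, ?_, ?_⟩
        · rw [pvToks, htok]; simp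
        · intro a i rest ha
          have hsh : pvToks (SF.pair u w) ++ rest
              = "[" :: (pvToks u ++ ("," :: (pvToks w ++ ("]" :: rest)))) := by
            simp [pvToks]
          rw [hsh, pvScanE_step_open a i _ (by omega)]
          rw [show pvToks u ++ ("," :: (pvToks w ++ ("]" :: rest)))
                = pvToks u ++ (("," :: (pvToks w ++ ("]" :: rest)))) from rfl]
          rw [hscan (a ++ [i]) (i + 1) _ (by simp [ha])]
          simp only [List.length_cons]
          push_cast
          ring
        · -- result tokens
          cases ra with
          | some rv =>
            -- right add absorbed into w
            have hpU : pvHasDig postU = false := by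
              by_cases hh : pvHasDig postU = true
              · rw [hh] at hoR; simp at hoR
              · simpa using hh
            have hrv : rv = y := by
              rw [hpU] at hoR; simp at hoR; omega
            rw [hrv] at hE
            simp only [Option.some.injEq, Prod.mk.injEq] at hE
            obtain ⟨h1, h2, h3⟩ := hE
            rw [← h1, pvToks, htok2, hpU, hpostDig, hpreEq]
            rw [pvRAddT_nodig y postU _ hpU, pvRAddT,
                if_neg (by decide : ¬ PySem.Str.strIsdigit "," = true),
                pvRAddT_toks y w (d + 1) hvw ["]"]]
            by_cases hpre : pvHasDig preU = true
            · rw [hpre]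
              simp only [if_pos rfl]
              rw [show ("[" : String) :: preU = ["["] ++ preU from rfl,
                  pvLAddT_dig x ["["] preU hpre]
              simp
            · rw [(by simpa using hpre : pvHasDig preU = false)]
              simp
          | none =>
            have hpU : pvHasDig postU = true := by
              by_cases hh : pvHasDig postU = true
              · exact hh
              · rw [(by simpa using hh : pvHasDig postU = false)] at hoR; simp at hoR
            simp only [Option.some.injEq, Prod.mk.injEq] at hE
            obtain ⟨h1, h2, h3⟩ := hE
            rw [← h1, pvToks, htok2, hpU, hpostDig, hpreEq]
            rw [pvRAddT_dig y postU _ hpU]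
            by_cases hpre : pvHasDig preU = true
            · rw [hpre]
              simp only [if_pos rfl]
              rw [show ("[" : String) :: preU = ["["] ++ preU from rfl,
                  pvLAddT_dig x ["["] preU hpre]
              simp
            · rw [(by simpa using hpre : pvHasDig preU = false)]
              simp
        · -- oL
          cases ra with
          | some rv =>
            simp only [Option.some.injEq, Prod.mk.injEq] at hE
            rw [← hE.2.1, hoL, hpreEq]
          | none =>
            simp only [Option.some.injEq, Prod.mk.injEq] at hE
            rw [← hE.2.1, hoL, hpreEq]
        · -- oR
          cases ra with
          | some rv =>
            simp only [Option.some.injEq, Prod.mk.injEq] at hE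
            rw [← hE.2.2, hpostDig]
            simp
          | none =>
            simp only [Option.some.injEq, Prod.mk.injEq] at hE
            rw [← hE.2.2, hpostDig]
            simp
        · intro _
          exact ⟨⟨preU, rfl⟩, ⟨postU ++ "," :: pvToks w, by simp⟩⟩
      | none =>
        rw [hu] at hE
        cases hw : pvExpl (d + 1) w with
        | some r =>
          obtain ⟨w2, la, ra⟩ := r
          rw [hw] at hE
          obtain ⟨x, y, preW, postW, hx0, hy0, htok, hscan, htok2, hoL, hoR, -⟩ :=
            ihw (d + 1) hvw (by omega) w2 la ra hw
          have hpreDig : pvHasDig (("[" :: pvToks u) ++ ("," :: preW)) = true := by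
            rw [pvHasDig_append, pvHasDig_cons, pvHasDig_toks u (d + 1) hvu]
            simp
          have hpostEq : pvHasDig (postW ++ ["]"]) = pvHasDig postW := by
            rw [pvHasDig_append, (by decide : pvHasDig ["]"] = false)]
            simp
          refine ⟨x, y, ("[" :: pvToks u) ++ ("," :: preW), postW ++ ["]"], hx0, hy0, ?_, ?_, ?_, ?_, ?_, ?_⟩
          · rw [pvToks, htok]; simp
          · intro a i rest ha
            have hsh : pvToks (SF.pair u w) ++ rest
                = "[" :: (pvToks u ++ ("," :: (pvToks w ++ ("]" :: rest)))) := by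
              simp [pvToks]
            rw [hsh, pvScanE_step_open a i _ (by omega)]
            rw [pvScanE_pass u (d + 1) hvu hu (by omega) (a ++ [i]) (i + 1) _ (by simp [ha])]
            rw [pvScanE_step_other "," _ _ _ (by decide) (by decide) (by simp [ha]; omega)]
            rw [hscan (a ++ [i]) _ _ (by simp [ha])]
            simp only [List.length_append, List.length_cons]
            push_cast
            ring
          · -- result tokens
            cases la with
            | some lv =>
              have hpW : pvHasDig preW = false := by
                by_cases hh : pvHasDig preW = true
                · rw [hh] at hoL; simp at hoL
                · simpa using hh
              have hlv : lv = x := by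
                rw [hpW] at hoL; simp at hoL; omega
              rw [hlv] at hE
              simp only [Option.some.injEq, Prod.mk.injEq] at hE
              obtain ⟨h1, h2, h3⟩ := hE
              rw [← h1, pvToks, htok2, hpW, hpreDig, hpostEq]
              simp only [if_pos rfl]
              have hcp : pvHasDig ("," :: preW) = false := by
                rw [pvHasDig_cons, hpW, (by decide : PySem.Str.strIsdigit "," = false)]
                rfl
              rw [pvLAddT_nodig x _ _ hcp,
                  show ("[" : String) :: pvToks u = ["["] ++ pvToks u from rfl,
                  pvLAddT_toks x u (d + 1) hvu ["["]]
              by_cases hpost : pvHasDig postW = true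
              · rw [hpost]
                simp only [if_pos rfl]
                rw [pvRAddT_dig y postW ["]"] hpost]
                simp
              · rw [(by simpa using hpost : pvHasDig postW = false)]
                simp
            | none =>
              have hpW : pvHasDig preW = true := by
                by_cases hh : pvHasDig preW = true
                · exact hh
                · rw [(by simpa using hh : pvHasDig preW = false)] at hoL; simp at hoL
              simp only [Option.some.injEq, Prod.mk.injEq] at hE
              obtain ⟨h1, h2, h3⟩ := hE
              rw [← h1, pvToks, htok2, hpW, hpreDig, hpostEq]
              simp only [if_pos rfl]
              have hcp : pvHasDig ("," :: preW) = true := by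
                rw [pvHasDig_cons, hpW]
                exact Bool.or_true _
              rw [pvLAddT_dig x _ _ hcp,
                  show ("," : String) :: preW = [","] ++ preW from rfl,
                  pvLAddT_dig x [","] preW hpW]
              by_cases hpost : pvHasDig postW = true
              · rw [hpost]
                simp only [if_pos rfl]
                rw [pvRAddT_dig y postW ["]"] hpost]
                simp
              · rw [(by simpa using hpost : pvHasDig postW = false)]
                simp
          · -- oL
            cases la with
            | some lv =>
              simp only [Option.some.injEq, Prod.mk.injEq] at hE
              rw [← hE.2.1, hpreDig]
              simp
            | none =>
              simp only [Option.some.injEq, Prod.mk.injEq] at hE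
              rw [← hE.2.1, hpreDig]
              simp
          · -- oR
            cases la with
            | some lv =>
              simp only [Option.some.injEq, Prod.mk.injEq] at hE
              rw [← hE.2.2, hoR, hpostEq]
            | none =>
              simp only [Option.some.injEq, Prod.mk.injEq] at hE
              rw [← hE.2.2, hoR, hpostEq]
          · intro _
            exact ⟨⟨pvToks u ++ ("," :: preW), by simp⟩, ⟨postW, rfl⟩⟩
        | none =>
          rw [hw] at hE
          exact absurd hE (by simp)

-- ---- split characterization and preservation ----
theorem pvSplit_none_pair (u v : SF) (h : pvSplit (.pair u v) = none) :
    pvSplit u = none ∧ pvSplit v = none := by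
  rw [pvSplit] at h
  cases hu : pvSplit u with
  | some r => rw [hu] at h; simp at h
  | none =>
    rw [hu] at h
    cases hv : pvSplit v with
    | some r => rw [hv] at h; simp at h
    | none => exact ⟨rfl, rfl⟩

theorem pvSplit_none_char (t : SF) (d : Nat) (hv : pvVld d t) (hS : pvSplit t = none) :
    ∀ s ∈ pvToks t, PySem.Str.len s = 1 := by
  induction t generalizing d with
  | leaf n =>
    rw [pvSplit] at hS
    have h9 : ¬ (10 ≤ n) := by
      intro hc
      rw [if_pos hc] at hS
      exact absurd hS (by simp)
    intro s hs
    rw [pvToks] at hs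
    simp at hs
    rw [hs]
    exact pvLen1 n hv (by omega)
  | pair u v ihu ihv =>
    obtain ⟨hu, hv2⟩ := pvSplit_none_pair u v hS
    obtain ⟨-, hvu, hvv⟩ := hv
    intro s hs
    rw [pvToks] at hs
    simp at hs
    rcases hs with rfl | hs | rfl | hs | rfl
    · decide
    · exact ihu (d + 1) hvu hu s hs
    · decide
    · exact ihv (d + 1) hvv hv2 s hs
    · decide

theorem pvSplit_some_char (t : SF) (d : Nat) (hv : pvVld d t) (hd : d ≤ 4)
    (hE : pvExpl d t = none) (t2 : SF) (hS : pvSplit t = some t2) :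
    ∃ (v : Int) (pre post : List String),
      10 ≤ v ∧ pvToks t = pre ++ PySem.Int.toStr v :: post ∧
      (∀ s ∈ pre, PySem.Str.len s = 1) ∧
      pvToks t2 = pre ++ "[" :: PySem.Int.toStr (PySem.Int.floordiv v 2) :: "," ::
        PySem.Int.toStr (PySem.Int.floordiv (v + 1) 2) :: "]" :: post ∧
      pvVld d t2 := by
  induction t generalizing d t2 with
  | leaf n =>
    rw [pvSplit] at hS
    by_cases h10 : 10 ≤ n
    · rw [if_pos h10] at hS
      simp only [Option.some.injEq] at hS
      refine ⟨n, [], [], h10, by simp [pvToks], by simp, ?_, ?_⟩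
      · rw [← hS]; simp [pvToks]
      · rw [← hS]
        have h2 : (0 : Int) < 2 := by norm_num
        refine ⟨by omega, ?_, ?_⟩ <;>
          rw [pvVld, PySem.Int.floordiv_eq_ediv_of_pos h2] <;>
          exact Int.ediv_nonneg (by omega) (by omega)
    · rw [if_neg h10] at hS
      exact absurd hS (by simp)
  | pair u w ihu ihw =>
    have hd3 : d ≤ 3 := by
      rcases Nat.lt_or_ge d 4 with h | h
      · omega
      · exfalso
        have hd4 : d = 4 := by omega
        subst hd4
        obtain ⟨h1, h2⟩ := pvVld_leaf5 u w hv
        rw [pvExpl, if_pos ⟨by omega, h1, h2⟩] at hE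
        exact absurd hE (by simp)
    obtain ⟨hEu, hEw⟩ := pvExpl_none_pair u w d hd3 hE
    obtain ⟨-, hvu, hvw⟩ := hv
    rw [pvSplit] at hS
    cases hu : pvSplit u with
    | some u2 =>
      rw [hu] at hS
      simp only [Option.some.injEq] at hS
      obtain ⟨v, preU, postU, h10, htok, hlen, htok2, hvld⟩ :=
        ihu (d + 1) hvu (by omega) hEu u2 hu
      refine ⟨v, "[" :: preU, postU ++ ("," :: (pvToks w ++ ["]"])), h10, ?_, ?_, ?_, ?_⟩
      · rw [pvToks, htok]; simp
      · intro s hs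
        rcases List.mem_cons.mp hs with rfl | hs
        · decide
        · exact hlen s hs
      · rw [← hS, pvToks, htok2]; simp
      · rw [← hS]
        exact ⟨by omega, hvld, hvw⟩
    | none =>
      rw [hu] at hS
      cases hw : pvSplit w with
      | some w2 =>
        rw [hw] at hS
        simp only [Option.some.injEq] at hS
        obtain ⟨v, preW, postW, h10, htok, hlen, htok2, hvld⟩ :=
          ihw (d + 1) hvw (by omega) hEw w2 hw
        refine ⟨v, ("[" :: pvToks u) ++ ("," :: preW), postW ++ ["]"], h10, ?_, ?_, ?_, ?_⟩
        · rw [pvToks, htok]; simp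
        · intro s hs
          simp at hs
          rcases hs with rfl | hs | rfl | hs
          · decide
          · exact pvSplit_none_char u (d + 1) hvu hu s hs
          · decide
          · exact hlen s hs
        · rw [← hS, pvToks, htok2]; simp
        · rw [← hS]
          exact ⟨by omega, hvu, hvld⟩
      | none =>
        rw [hw] at hS
        exact absurd hS (by simp)

theorem pvExpl_pres (t : SF) (d : Nat) (hv : pvVld d t) (t2 : SF) (oL oR : Option Int)
    (hE : pvExpl d t = some (t2, oL, oR)) :
    pvVld d t2 ∧ (∀ v, oL = some v → 0 ≤ v) ∧ (∀ v, oR = some v → 0 ≤ v) := by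
  induction t generalizing d t2 oL oR with
  | leaf n => exact absurd hE (by simp [pvExpl])
  | pair u w ihu ihw =>
    by_cases hguard : 4 ≤ d ∧ u.isLeaf = true ∧ w.isLeaf = true
    · rw [pvExpl, if_pos hguard] at hE
      simp only [Option.some.injEq, Prod.mk.injEq] at hE
      obtain ⟨h1, h2, h3⟩ := hE
      obtain ⟨x, rfl⟩ : ∃ x, u = SF.leaf x := by
        cases u with
        | leaf n => exact ⟨n, rfl⟩
        | pair a b => exact absurd hguard.2.1 (by simp [SF.isLeaf])
      obtain ⟨y, rfl⟩ : ∃ y, w = SF.leaf y := by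
        cases w with
        | leaf n => exact ⟨n, rfl⟩
        | pair a b => exact absurd hguard.2.2 (by simp [SF.isLeaf])
      refine ⟨by rw [← h1]; exact le_refl 0, ?_, ?_⟩
      · intro v hvv; rw [← h2] at hvv; simp [SF.val] at hvv; rw [← hvv]; exact hv.2.1
      · intro v hvv; rw [← h3] at hvv; simp [SF.val] at hvv; rw [← hvv]; exact hv.2.2
    · obtain ⟨hdep, hvu, hvw⟩ := hv
      rw [pvExpl, if_neg hguard] at hE
      cases hu : pvExpl (d + 1) u with
      | some r =>
        obtain ⟨u2, la, ra⟩ := r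
        rw [hu] at hE
        obtain ⟨hv2, hL, hR⟩ := ihu (d + 1) hvu u2 la ra hu
        cases ra with
        | some rv =>
          simp only [Option.some.injEq, Prod.mk.injEq] at hE
          obtain ⟨h1, h2, h3⟩ := hE
          refine ⟨?_, ?_, ?_⟩
          · rw [← h1]
            exact ⟨hdep, hv2, pvVld_addL w (d + 1) rv hvw (hR rv rfl)⟩
          · intro v hvv; rw [← h2] at hvv; exact hL v hvv
          · intro v hvv; rw [← h3] at hvv; simp at hvv
        | none =>
          simp only [Option.some.injEq, Prod.mk.injEq] at hE
          obtain ⟨h1, h2, h3⟩ := hE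
          refine ⟨?_, ?_, ?_⟩
          · rw [← h1]; exact ⟨hdep, hv2, hvw⟩
          · intro v hvv; rw [← h2] at hvv; exact hL v hvv
          · intro v hvv; rw [← h3] at hvv; simp at hvv
      | none =>
        rw [hu] at hE
        cases hw : pvExpl (d + 1) w with
        | some r =>
          obtain ⟨w2, la, ra⟩ := r
          rw [hw] at hE
          obtain ⟨hv2, hL, hR⟩ := ihw (d + 1) hvw w2 la ra hw
          cases la with
          | some lv =>
            simp only [Option.some.injEq, Prod.mk.injEq] at hE
            obtain ⟨h1, h2, h3⟩ := hE
            refine ⟨?_, ?_, ?_⟩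
            · rw [← h1]
              exact ⟨hdep, pvVld_addR u (d + 1) lv hvu (hL lv rfl), hv2⟩
            · intro v hvv; rw [← h2] at hvv; simp at hvv
            · intro v hvv; rw [← h3] at hvv; exact hR v hvv
          | none =>
            simp only [Option.some.injEq, Prod.mk.injEq] at hE
            obtain ⟨h1, h2, h3⟩ := hE
            refine ⟨?_, ?_, ?_⟩
            · rw [← h1]; exact ⟨hdep, hvu, hv2⟩
            · intro v hvv; rw [← h2] at hvv; simp at hvv
            · intro v hvv; rw [← h3] at hvv; exact hR v hvv
        | none =>
          rw [hw] at hE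
          exact absurd hE (by simp)

theorem pvExpl_root_pair (u w : SF) (t2 : SF) (oL oR : Option Int)
    (hE : pvExpl 0 (.pair u w) = some (t2, oL, oR)) : ∃ p q, t2 = SF.pair p q := by
  rw [pvExpl, if_neg (by rintro ⟨h4, -⟩; omega)] at hE
  cases hu : pvExpl 1 u with
  | some r =>
    obtain ⟨u2, la, ra⟩ := r
    rw [hu] at hE
    cases ra <;> simp only [Option.some.injEq, Prod.mk.injEq] at hE <;>
      exact ⟨_, _, hE.1.symm⟩
  | none =>
    rw [hu] at hE
    cases hw : pvExpl 1 w with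
    | some r =>
      obtain ⟨w2, la, ra⟩ := r
      rw [hw] at hE
      cases la <;> simp only [Option.some.injEq, Prod.mk.injEq] at hE <;>
        exact ⟨_, _, hE.1.symm⟩
    | none =>
      rw [hw] at hE
      exact absurd hE (by simp)

theorem pvSplit_root_pair (u w : SF) (t2 : SF) (hS : pvSplit (.pair u w) = some t2) :
    ∃ p q, t2 = SF.pair p q := by
  rw [pvSplit] at hS
  cases hu : pvSplit u with
  | some u2 =>
    rw [hu] at hS
    simp only [Option.some.injEq] at hS
    exact ⟨_, _, hS.symm⟩
  | none =>
    rw [hu] at hS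
    cases hw : pvSplit w with
    | some w2 =>
      rw [hw] at hS
      simp only [Option.some.injEq] at hS
      exact ⟨_, _, hS.symm⟩
    | none =>
      rw [hw] at hS
      exact absurd hS (by simp)

-- ---- evaluating one A-iteration on decomposed token lists ----
theorem pvStepA_none_core (l : List String)
    (hlen1 : ∀ s ∈ l, PySem.Str.len s = 1)
    (hscan0 : pvScanE l [] 0 = (l.length : Int) - 1) :
    pvStepA l = none := by
  unfold pvStepA
  rw [hscan0, pvScanK_none l 0 hlen1]
  simp

theorem pvStepA_split_core (pre post : List String) (v : Int) (h10 : 10 ≤ v)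
    (hlen1 : ∀ s ∈ pre, PySem.Str.len s = 1) (hpost : post ≠ [])
    (hscan0 : pvScanE (pre ++ PySem.Int.toStr v :: post) [] 0
        = ((pre ++ PySem.Int.toStr v :: post).length : Int) - 1) :
    pvStepA (pre ++ PySem.Int.toStr v :: post) =
      some (pre ++ "[" :: PySem.Int.toStr (PySem.Int.floordiv v 2) :: "," ::
        PySem.Int.toStr (PySem.Int.floordiv (v + 1) 2) :: "]" :: post) := by
  have hkl : pvScanK (pre ++ PySem.Int.toStr v :: post) 0 = (pre.length : Int) := by
    simpa using pvScanK_found pre _ post 0 hlen1 (pvLenBig v h10)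
  have hlen : (pre ++ PySem.Int.toStr v :: post).length = pre.length + 1 + post.length := by
    simp
    omega
  have hpostlen : 1 ≤ post.length := by
    cases post with
    | nil => exact absurd rfl hpost
    | cons a b => simp
  have hget : PySem.List.pyGetD (pre ++ PySem.Int.toStr v :: post) (pre.length : Int) ""
      = PySem.Int.toStr v := by
    rw [PySem.List.pyGetD_natCast, List.getD_append_right pre _ "" pre.length (le_refl _)]
    simp
  have hsl1 : PySem.List.slice (pre ++ PySem.Int.toStr v :: post) none (some (pre.length : Int)) = pre := by
    rw [PySem.List.slice_to_natCast, List.take_left' rfl]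
  have hsl2 : PySem.List.slice (pre ++ PySem.Int.toStr v :: post) (some ((pre.length : Int) + 1)) none = post := by
    rw [show ((pre.length : Int) + 1) = ((pre.length + 1 : Nat) : Int) by push_cast; ring,
        PySem.List.slice_from_natCast,
        show pre ++ PySem.Int.toStr v :: post = (pre ++ [PySem.Int.toStr v]) ++ post by simp,
        show pre.length + 1 = (pre ++ [PySem.Int.toStr v]).length by simp,
        List.drop_left]
  unfold pvStepA
  rw [hscan0, hkl]
  rw [if_neg (by simp)]
  rw [if_pos (by rw [hlen]; push_cast; omega)]
  rw [hget, pvRound v (by omega), hsl1, hsl2]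
  simp

theorem pvStepA_explode_core (pre post : List String) (x y : Int)
    (hx : 0 ≤ x) (hy : 0 ≤ y)
    (hpre0 : ∃ pre1, pre = "[" :: pre1) (hpost0 : ∃ post1, post = post1 ++ ["]"])
    (hscan0 : pvScanE (pre ++ "[" :: PySem.Int.toStr x :: "," :: PySem.Int.toStr y :: "]" :: post) [] 0
        = (pre.length : Int)) :
    pvStepA (pre ++ "[" :: PySem.Int.toStr x :: "," :: PySem.Int.toStr y :: "]" :: post) =
      some ((if pvHasDig pre then pvLAddT x pre else pre) ++ "0" ::
            (if pvHasDig post then pvRAddT y post else post)) := by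
  have hLr : pre ++ "[" :: PySem.Int.toStr x :: "," :: PySem.Int.toStr y :: "]" :: post
      = (pre ++ ["[", PySem.Int.toStr x, ",", PySem.Int.toStr y, "]"]) ++ post := by simp
  have hlen : (pre ++ "[" :: PySem.Int.toStr x :: "," :: PySem.Int.toStr y :: "]" :: post).length
      = pre.length + 5 + post.length := by simp; omega
  have hne : (pre.length : Int)
      ≠ ((pre ++ "[" :: PySem.Int.toStr x :: "," :: PySem.Int.toStr y :: "]" :: post).length : Int) - 1 := by
    rw [hlen]; push_cast; omega
  have hget1 : PySem.List.pyGetD (pre ++ "[" :: PySem.Int.toStr x :: "," :: PySem.Int.toStr y :: "]" :: post)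
      ((pre.length : Int) + 1) "" = PySem.Int.toStr x := by
    rw [show ((pre.length : Int) + 1) = ((pre.length + 1 : Nat) : Int) by push_cast; ring,
        PySem.List.pyGetD_natCast,
        List.getD_append_right pre _ "" (pre.length + 1) (by omega)]
    simp
  have hget3 : PySem.List.pyGetD (pre ++ "[" :: PySem.Int.toStr x :: "," :: PySem.Int.toStr y :: "]" :: post)
      ((pre.length : Int) + 3) "" = PySem.Int.toStr y := by
    rw [show ((pre.length : Int) + 3) = ((pre.length + 3 : Nat) : Int) by push_cast; ring,
        PySem.List.pyGetD_natCast,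
        List.getD_append_right pre _ "" (pre.length + 3) (by omega)]
    simp
  have hdrop : PySem.List.slice (pre ++ "[" :: PySem.Int.toStr x :: "," :: PySem.Int.toStr y :: "]" :: post)
      (some ((pre.length : Int) + 5)) none = post := by
    rw [show ((pre.length : Int) + 5) = ((pre.length + 5 : Nat) : Int) by push_cast; ring,
        PySem.List.slice_from_natCast, hLr,
        show pre.length + 5 = (pre ++ ["[", PySem.Int.toStr x, ",", PySem.Int.toStr y, "]"]).length by simp,
        List.drop_left]
  unfold pvStepA
  simp only [ne_eq]
  rw [hscan0, if_pos hne, hget1, hget3, pvRound x hx, pvRound y hy, hdrop]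
  by_cases hpost : pvHasDig post = true
  · -- a right neighbour exists
    obtain ⟨dp, s, dr, hpdec, hdpnd, hsdig⟩ := pvFirstDig post hpost
    have hdr : dr ≠ [] := by
      rintro rfl
      obtain ⟨post1, hpost1⟩ := hpost0
      have hlast : some s = some "]" := by
        rw [show some s = (dp ++ [s]).getLast? from List.getLast?_concat.symm, ← hpdec, hpost1]
        exact List.getLast?_concat
      simp at hlast
      rw [hlast] at hsdig
      exact absurd hsdig (by decide)
    have hdr1 : 1 ≤ dr.length := List.length_pos_iff.mpr hdr
    have hpostlen : post.length = dp.length + 1 + dr.length := by rw [hpdec]; simp; omega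
    have hw : pvScanW post ((pre.length : Int) + 5) = (pre.length : Int) + 5 + dp.length := by
      rw [hpdec]; exact pvScanW_found dp s dr _ hdpnd hsdig
    have hwne : (pre.length : Int) + 5 + dp.length
        ≠ ((pre ++ "[" :: PySem.Int.toStr x :: "," :: PySem.Int.toStr y :: "]" :: post).length : Int) - 1 := by
      rw [hlen]; push_cast; omega
    rw [hw, if_pos hwne]
    have hL2 : pre ++ "[" :: PySem.Int.toStr x :: "," :: PySem.Int.toStr y :: "]" :: post
        = ((pre ++ ["[", PySem.Int.toStr x, ",", PySem.Int.toStr y, "]"]) ++ dp) ++ s :: dr := by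
      rw [hLr, hpdec]; simp
    have hMlen : ((pre ++ ["[", PySem.Int.toStr x, ",", PySem.Int.toStr y, "]"]) ++ dp).length
        = pre.length + 5 + dp.length := by simp; omega
    have hgetw : PySem.List.pyGetD (pre ++ "[" :: PySem.Int.toStr x :: "," :: PySem.Int.toStr y :: "]" :: post)
        ((pre.length : Int) + 5 + (dp.length : Int)) "" = s := by
      rw [show ((pre.length : Int) + 5 + (dp.length : Int)) = ((pre.length + 5 + dp.length : Nat) : Int) by push_cast; ring,
          PySem.List.pyGetD_natCast, hL2,
          List.getD_append_right _ _ "" (pre.length + 5 + dp.length) (by omega)]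
      rw [show pre.length + 5 + dp.length - ((pre ++ ["[", PySem.Int.toStr x, ",", PySem.Int.toStr y, "]"]) ++ dp).length = 0 by omega]
      simp
    have hsetw : PySem.List.pySetD (pre ++ "[" :: PySem.Int.toStr x :: "," :: PySem.Int.toStr y :: "]" :: post)
        ((pre.length : Int) + 5 + (dp.length : Int)) (PySem.Int.toStr (pvPyInt s + y))
        = pre ++ "[" :: PySem.Int.toStr x :: "," :: PySem.Int.toStr y :: "]" :: (dp ++ PySem.Int.toStr (pvPyInt s + y) :: dr) := by
      rw [show ((pre.length : Int) + 5 + (dp.length : Int)) = ((pre.length + 5 + dp.length : Nat) : Int) by push_cast; ring,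
          PySem.List.pySetD_natCast, hL2,
          List.set_append_right _ _ (by omega)]
      rw [show pre.length + 5 + dp.length - ((pre ++ ["[", PySem.Int.toStr x, ",", PySem.Int.toStr y, "]"]) ++ dp).length = 0 by omega]
      simp
    rw [hgetw, hsetw]
    have hradd : pvRAddT y post = dp ++ PySem.Int.toStr (pvPyInt s + y) :: dr := by
      rw [hpdec]; exact pvRAddT_decomp y dp s dr hdpnd hsdig
    -- left scan on the (unchanged) prefix
    have hsl1 : PySem.List.slice (pre ++ "[" :: PySem.Int.toStr x :: "," :: PySem.Int.toStr y :: "]" :: (dp ++ PySem.Int.toStr (pvPyInt s + y) :: dr)) none (some (pre.length : Int)) = pre := by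
      rw [PySem.List.slice_to_natCast]
      exact List.take_left' rfl
    rw [hsl1]
    by_cases hpre : pvHasDig pre = true
    · obtain ⟨p1, s2, p2, hqdec, hp2nd, hs2dig⟩ := pvLastDig pre hpre
      have hplen : pre.length = p1.length + 1 + p2.length := by rw [hqdec]; simp; omega
      have hp1ne : p1 ≠ [] := by
        rintro rfl
        obtain ⟨pre1, hpre1⟩ := hpre0
        rw [hpre1] at hqdec
        simp at hqdec
        rw [← hqdec.1] at hs2dig
        exact absurd hs2dig (by decide)
      have hq : pvScanQ pre.reverse ((pre.length : Int) - 1) = (p1.length : Int) := by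
        rw [hqdec, show (p1 ++ s2 :: p2).reverse = p2.reverse ++ s2 :: p1.reverse by simp,
            pvScanQ_found p2.reverse s2 p1.reverse _ (by rw [pvHasDig_reverse]; exact hp2nd) hs2dig]
        simp only [List.length_append, List.length_cons, List.length_reverse]
        push_cast; omega
      rw [hq, if_pos (by
        have : 1 ≤ p1.length := List.length_pos_iff.mpr hp1ne
        push_cast; omega)]
      have hgetq : PySem.List.pyGetD (pre ++ "[" :: PySem.Int.toStr x :: "," :: PySem.Int.toStr y :: "]" :: (dp ++ PySem.Int.toStr (pvPyInt s + y) :: dr)) ((p1.length : Nat) : Int) "" = s2 := by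
        rw [PySem.List.pyGetD_natCast, List.getD_append _ _ _ _ (by omega)]
        rw [hqdec, List.getD_append_right p1 _ "" p1.length (le_refl _)]
        simp
      have hsetq : PySem.List.pySetD (pre ++ "[" :: PySem.Int.toStr x :: "," :: PySem.Int.toStr y :: "]" :: (dp ++ PySem.Int.toStr (pvPyInt s + y) :: dr)) ((p1.length : Nat) : Int) (PySem.Int.toStr (pvPyInt s2 + x))
          = pvLAddT x pre ++ "[" :: PySem.Int.toStr x :: "," :: PySem.Int.toStr y :: "]" :: (dp ++ PySem.Int.toStr (pvPyInt s + y) :: dr) := by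
        rw [PySem.List.pySetD_natCast, List.set_append_left _ _ (by omega)]
        congr 1
        rw [hqdec, List.set_append_right _ _ (le_refl _),
            pvLAddT_decomp x p1 s2 p2 hp2nd hs2dig]
        simp
      rw [hgetq, hsetq]
      have hsl2 : PySem.List.slice (pvLAddT x pre ++ "[" :: PySem.Int.toStr x :: "," :: PySem.Int.toStr y :: "]" :: (dp ++ PySem.Int.toStr (pvPyInt s + y) :: dr)) none (some (pre.length : Int)) = pvLAddT x pre := by
        rw [PySem.List.slice_to_natCast]
        exact List.take_left' (pvLen_pvLAddT x pre)
      have hsl3 : PySem.List.slice (pvLAddT x pre ++ "[" :: PySem.Int.toStr x :: "," :: PySem.Int.toStr y :: "]" :: (dp ++ PySem.Int.toStr (pvPyInt s + y) :: dr)) (some ((pre.length : Int) + 5)) none = dp ++ PySem.Int.toStr (pvPyInt s + y) :: dr := by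
        rw [show ((pre.length : Int) + 5) = ((pre.length + 5 : Nat) : Int) by push_cast; ring,
            PySem.List.slice_from_natCast,
            show pvLAddT x pre ++ "[" :: PySem.Int.toStr x :: "," :: PySem.Int.toStr y :: "]" :: (dp ++ PySem.Int.toStr (pvPyInt s + y) :: dr)
              = (pvLAddT x pre ++ ["[", PySem.Int.toStr x, ",", PySem.Int.toStr y, "]"]) ++ (dp ++ PySem.Int.toStr (pvPyInt s + y) :: dr) by simp,
            show pre.length + 5 = (pvLAddT x pre ++ ["[", PySem.Int.toStr x, ",", PySem.Int.toStr y, "]"]).length by simp [pvLen_pvLAddT],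
            List.drop_left]
      rw [hsl2, hsl3, hpost, hpre, hradd]
      simp
    · have hpreF : pvHasDig pre = false := by simpa using hpre
      have hq : pvScanQ pre.reverse ((pre.length : Int) - 1) = 0 := by
        rw [pvScanQ_none pre.reverse ((pre.length : Int) - 1) (by rw [pvHasDig_reverse]; exact hpreF)]
        simp
      rw [hq, if_neg (by simp)]
      have hsl2 : PySem.List.slice (pre ++ "[" :: PySem.Int.toStr x :: "," :: PySem.Int.toStr y :: "]" :: (dp ++ PySem.Int.toStr (pvPyInt s + y) :: dr)) none (some (pre.length : Int)) = pre := by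
        rw [PySem.List.slice_to_natCast]
        exact List.take_left' rfl
      have hsl3 : PySem.List.slice (pre ++ "[" :: PySem.Int.toStr x :: "," :: PySem.Int.toStr y :: "]" :: (dp ++ PySem.Int.toStr (pvPyInt s + y) :: dr)) (some ((pre.length : Int) + 5)) none = dp ++ PySem.Int.toStr (pvPyInt s + y) :: dr := by
        rw [show ((pre.length : Int) + 5) = ((pre.length + 5 : Nat) : Int) by push_cast; ring,
            PySem.List.slice_from_natCast,
            show pre ++ "[" :: PySem.Int.toStr x :: "," :: PySem.Int.toStr y :: "]" :: (dp ++ PySem.Int.toStr (pvPyInt s + y) :: dr)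
              = (pre ++ ["[", PySem.Int.toStr x, ",", PySem.Int.toStr y, "]"]) ++ (dp ++ PySem.Int.toStr (pvPyInt s + y) :: dr) by simp,
            show pre.length + 5 = (pre ++ ["[", PySem.Int.toStr x, ",", PySem.Int.toStr y, "]"]).length by simp,
            List.drop_left]
      rw [hsl2, hsl3, hpost, hpreF, hradd]
      simp
  · -- no right neighbour: the w update is skipped
    have hpostF : pvHasDig post = false := by simpa using hpost
    have hw : pvScanW post ((pre.length : Int) + 5)
        = ((pre ++ "[" :: PySem.Int.toStr x :: "," :: PySem.Int.toStr y :: "]" :: post).length : Int) - 1 := by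
      rw [pvScanW_none post _ hpostF, hlen]
      push_cast; ring
    rw [hw, if_neg (show ¬ (((pre ++ "[" :: PySem.Int.toStr x :: "," :: PySem.Int.toStr y :: "]" :: post).length : Int) - 1
          ≠ ((pre ++ "[" :: PySem.Int.toStr x :: "," :: PySem.Int.toStr y :: "]" :: post).length : Int) - 1) by simp)]
    have hsl1 : PySem.List.slice (pre ++ "[" :: PySem.Int.toStr x :: "," :: PySem.Int.toStr y :: "]" :: post) none (some (pre.length : Int)) = pre := by
      rw [PySem.List.slice_to_natCast]
      exact List.take_left' rfl
    rw [hsl1]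
    by_cases hpre : pvHasDig pre = true
    · obtain ⟨p1, s2, p2, hqdec, hp2nd, hs2dig⟩ := pvLastDig pre hpre
      have hplen : pre.length = p1.length + 1 + p2.length := by rw [hqdec]; simp; omega
      have hp1ne : p1 ≠ [] := by
        rintro rfl
        obtain ⟨pre1, hpre1⟩ := hpre0
        rw [hpre1] at hqdec
        simp at hqdec
        rw [← hqdec.1] at hs2dig
        exact absurd hs2dig (by decide)
      have hq : pvScanQ pre.reverse ((pre.length : Int) - 1) = (p1.length : Int) := by
        rw [hqdec, show (p1 ++ s2 :: p2).reverse = p2.reverse ++ s2 :: p1.reverse by simp,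
            pvScanQ_found p2.reverse s2 p1.reverse _ (by rw [pvHasDig_reverse]; exact hp2nd) hs2dig]
        simp only [List.length_append, List.length_cons, List.length_reverse]
        push_cast; omega
      rw [hq, if_pos (by
        have : 1 ≤ p1.length := List.length_pos_iff.mpr hp1ne
        push_cast; omega)]
      have hgetq : PySem.List.pyGetD (pre ++ "[" :: PySem.Int.toStr x :: "," :: PySem.Int.toStr y :: "]" :: post) ((p1.length : Nat) : Int) "" = s2 := by
        rw [PySem.List.pyGetD_natCast, List.getD_append _ _ _ _ (by omega)]
        rw [hqdec, List.getD_append_right p1 _ "" p1.length (le_refl _)]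
        simp
      have hsetq : PySem.List.pySetD (pre ++ "[" :: PySem.Int.toStr x :: "," :: PySem.Int.toStr y :: "]" :: post) ((p1.length : Nat) : Int) (PySem.Int.toStr (pvPyInt s2 + x))
          = pvLAddT x pre ++ "[" :: PySem.Int.toStr x :: "," :: PySem.Int.toStr y :: "]" :: post := by
        rw [PySem.List.pySetD_natCast, List.set_append_left _ _ (by omega)]
        congr 1
        rw [hqdec, List.set_append_right _ _ (le_refl _),
            pvLAddT_decomp x p1 s2 p2 hp2nd hs2dig]
        simp
      rw [hgetq, hsetq]
      have hsl2 : PySem.List.slice (pvLAddT x pre ++ "[" :: PySem.Int.toStr x :: "," :: PySem.Int.toStr y :: "]" :: post) none (some (pre.length : Int)) = pvLAddT x pre := by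
        rw [PySem.List.slice_to_natCast]
        exact List.take_left' (pvLen_pvLAddT x pre)
      have hsl3 : PySem.List.slice (pvLAddT x pre ++ "[" :: PySem.Int.toStr x :: "," :: PySem.Int.toStr y :: "]" :: post) (some ((pre.length : Int) + 5)) none = post := by
        rw [show ((pre.length : Int) + 5) = ((pre.length + 5 : Nat) : Int) by push_cast; ring,
            PySem.List.slice_from_natCast,
            show pvLAddT x pre ++ "[" :: PySem.Int.toStr x :: "," :: PySem.Int.toStr y :: "]" :: post
              = (pvLAddT x pre ++ ["[", PySem.Int.toStr x, ",", PySem.Int.toStr y, "]"]) ++ post by simp,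
            show pre.length + 5 = (pvLAddT x pre ++ ["[", PySem.Int.toStr x, ",", PySem.Int.toStr y, "]"]).length by simp [pvLen_pvLAddT],
            List.drop_left]
      rw [hsl2, hsl3, hpostF, hpre]
      simp
    · have hpreF : pvHasDig pre = false := by simpa using hpre
      have hq : pvScanQ pre.reverse ((pre.length : Int) - 1) = 0 := by
        rw [pvScanQ_none pre.reverse ((pre.length : Int) - 1) (by rw [pvHasDig_reverse]; exact hpreF)]
        simp
      rw [hq, if_neg (by simp)]
      have hsl3 : PySem.List.slice (pre ++ "[" :: PySem.Int.toStr x :: "," :: PySem.Int.toStr y :: "]" :: post) (some ((pre.length : Int) + 5)) none = post := by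
        rw [show ((pre.length : Int) + 5) = ((pre.length + 5 : Nat) : Int) by push_cast; ring,
            PySem.List.slice_from_natCast, hLr,
            show pre.length + 5 = (pre ++ ["[", PySem.Int.toStr x, ",", PySem.Int.toStr y, "]"]).length by simp,
            List.drop_left]
      rw [hsl1, hsl3, hpostF, hpreF]
      simp

-- ---- one loop iteration corresponds ----
theorem pvScanE_nil (a : List Int) (i : Int) : pvScanE [] a i = i - 1 := rfl

theorem pvStep_expl (t : SF) (hv : pvVld 0 t) (t2 : SF) (oL oR : Option Int)
    (hE : pvExpl 0 t = some (t2, oL, oR)) : pvStepA (pvToks t) = some (pvToks t2) := by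
  obtain ⟨x, y, pre, post, hx, hy, htok, hscan, htok2, hoL, hoR, hextra⟩ :=
    pvExpl_char t 0 hv (by omega) t2 oL oR hE
  obtain ⟨hpre0, hpost0⟩ := hextra (by omega)
  have hscan0 : pvScanE (pre ++ "[" :: PySem.Int.toStr x :: "," :: PySem.Int.toStr y :: "]" :: post) [] 0
      = (pre.length : Int) := by
    have h := hscan [] 0 [] rfl
    rw [List.append_nil, htok] at h
    simpa using h
  rw [htok, htok2]
  exact pvStepA_explode_core pre post x y hx hy hpre0 hpost0 hscan0

theorem pvScanE_whole (t : SF) (hv : pvVld 0 t) (hE : pvExpl 0 t = none) :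
    pvScanE (pvToks t) [] 0 = ((pvToks t).length : Int) - 1 := by
  have h := pvScanE_pass t 0 hv hE (by omega) [] 0 [] rfl
  rw [List.append_nil] at h
  rw [h, pvScanE_nil]
  ring

theorem pvToks_getLast_pair (u w : SF) :
    (pvToks (SF.pair u w)).getLast? = some "]" := by
  rw [pvToks_pair_eq_concat]
  exact List.getLast?_concat

theorem pvStep_split (t : SF) (hv : pvVld 0 t) (h9 : ∀ n, t = SF.leaf n → n ≤ 9)
    (hE : pvExpl 0 t = none) (t2 : SF) (hS : pvSplit t = some t2) :
    pvStepA (pvToks t) = some (pvToks t2) := by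
  obtain ⟨v, pre, post, h10, htok, hlen1, htok2, -⟩ :=
    pvSplit_some_char t 0 hv (by omega) hE t2 hS
  have hpost : post ≠ [] := by
    cases t with
    | leaf n =>
      have := h9 n rfl
      rw [pvSplit] at hS
      rw [if_neg (by omega)] at hS
      exact absurd hS (by simp)
    | pair u w =>
      rintro rfl
      have h1 := pvToks_getLast_pair u w
      rw [htok] at h1
      simp at h1
      have := pvTokNeBrk v (by omega)
      exact this.2.1 h1
  have hscan0 := pvScanE_whole t hv hE
  rw [htok] at hscan0
  rw [htok, htok2]
  exact pvStepA_split_core pre post v h10 hlen1 hpost hscan0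

theorem pvStep_none (t : SF) (hv : pvVld 0 t) (hE : pvExpl 0 t = none)
    (hS : pvSplit t = none) : pvStepA (pvToks t) = none :=
  pvStepA_none_core (pvToks t) (pvSplit_none_char t 0 hv hS) (pvScanE_whole t hv hE)

theorem pvExpl_leaf (d : Nat) (n : Int) : pvExpl d (.leaf n) = none := rfl

theorem pvSplit_leaf_le9 (n : Int) (h : n ≤ 9) : pvSplit (.leaf n) = none := by
  rw [pvSplit, if_neg (by omega)]

-- ---- the whole loop corresponds ----
theorem pvLoop_corr (fuel : Nat) (t : SF) (hv : pvVld 0 t)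
    (h9 : ∀ n, t = SF.leaf n → n ≤ 9) :
    pvLoopA fuel (pvToks t) = pvToks (pvLoopB fuel t) := by
  induction fuel generalizing t with
  | zero => rfl
  | succ f ih =>
    cases hE : pvExpl 0 t with
    | some r =>
      obtain ⟨t2, oL, oR⟩ := r
      have hA := pvStep_expl t hv t2 oL oR hE
      have htpair : ∃ u w, t = SF.pair u w := by
        cases t with
        | leaf n => exact absurd hE (by rw [pvExpl_leaf]; simp)
        | pair u w => exact ⟨u, w, rfl⟩
      obtain ⟨u, w, rfl⟩ := htpair
      obtain ⟨p, q, hpq⟩ := pvExpl_root_pair u w t2 oL oR hE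
      have h92 : ∀ n, t2 = SF.leaf n → n ≤ 9 := by
        intro n hn
        rw [hpq] at hn
        exact absurd hn (by simp)
      simp only [pvLoopA, pvLoopB, hA, hE]
      exact ih t2 (pvExpl_pres _ 0 hv t2 oL oR hE).1 h92
    | none =>
      cases hS : pvSplit t with
      | some t2 =>
        have hA := pvStep_split t hv h9 hE t2 hS
        have htpair : ∃ u w, t = SF.pair u w := by
          cases t with
          | leaf n =>
            have := h9 n rfl
            exact absurd hS (by rw [pvSplit_leaf_le9 n this]; simp)
          | pair u w => exact ⟨u, w, rfl⟩
        obtain ⟨u, w, rfl⟩ := htpair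
        obtain ⟨p, q, hpq⟩ := pvSplit_root_pair u w t2 hS
        have h92 : ∀ n, t2 = SF.leaf n → n ≤ 9 := by
          intro n hn
          rw [hpq] at hn
          exact absurd hn (by simp)
        obtain ⟨-, -, -, -, -, -, -, hvld⟩ :=
          pvSplit_some_char _ 0 hv (by omega) hE t2 hS
        simp only [pvLoopA, pvLoopB, hA, hE, hS]
        exact ih t2 hvld h92
      | none =>
        have hA := pvStep_none t hv hE hS
        simp only [pvLoopA, pvLoopB, hA, hE, hS]

-- ---- precondition soundness: a accepted string is the rendering of a good tree ----
def pvGoodT : Nat → SF → Prop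
  | _, .leaf n => 0 ≤ n ∧ n ≤ 9
  | d, .pair a b => d + 1 ≤ 5 ∧ pvGoodT (d + 1) a ∧ pvGoodT (d + 1) b

theorem pvGood_vld (t : SF) (d : Nat) (h : pvGoodT d t) : pvVld d t := by
  induction t generalizing d with
  | leaf n => exact h.1
  | pair a b iha ihb => exact ⟨h.1, iha (d + 1) h.2.1, ihb (d + 1) h.2.2⟩

theorem pvFoldl_none (s : List Char) : List.foldl pvPreStep none s = none := by
  induction s with
  | nil => rfl
  | cons c r ih => exact ih

theorem pvExpect (e : Char) (st : List Char) (s : List Char) (he : e ≠ 'E')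
    (h : List.foldl pvPreStep (some (e :: st)) s = some []) :
    ∃ s', s = e :: s' ∧ List.foldl pvPreStep (some st) s' = some [] := by
  cases s with
  | nil => simp at h
  | cons c s' =>
    rw [List.foldl_cons] at h
    by_cases hc : c = e
    · subst hc
      refine ⟨s', rfl, ?_⟩
      rw [show pvPreStep (some (c :: st)) c = some st by
        rw [pvPreStep]; rw [if_neg he, if_pos rfl]] at h
      exact h
    · rw [show pvPreStep (some (e :: st)) c = none by
        rw [pvPreStep]; rw [if_neg he, if_neg (fun hh => hc hh)]] at h
      rw [pvFoldl_none] at h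
      exact absurd h (by simp)

theorem pvPre_sound (N : Nat) : ∀ (s : List Char), s.length ≤ N → ∀ (st : List Char),
    List.foldl pvPreStep (some ('E' :: st)) s = some [] →
    ∃ t r, s = pvSer t ++ r ∧ pvGoodT (st.count ']') t ∧
      List.foldl pvPreStep (some st) r = some [] := by
  induction N with
  | zero =>
    intro s hs st h
    have hnil : s = [] := List.length_eq_zero_iff.mp (by omega)
    subst hnil
    simp at h
  | succ N ih =>
    intro s hs st h
    cases s with
    | nil => simp at h
    | cons c s1 =>
      rw [List.foldl_cons] at h
      by_cases hdig : PySem.Chars.isdigit c = true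
      · rw [show pvPreStep (some ('E' :: st)) c = some st by
          rw [pvPreStep]; rw [if_pos rfl, if_pos hdig]] at h
        obtain ⟨g1, g2⟩ := pvDigitBounds c hdig
        refine ⟨.leaf ((c.toNat : Int) - 48), s1, ?_, ?_, h⟩
        · rw [pvSer, pvToChars_digit c hdig]
          simp
        · exact ⟨by omega, by omega⟩
      · by_cases hbr : c = '[' ∧ st.count ']' < 5
        · rw [show pvPreStep (some ('E' :: st)) c = some ('E' :: ',' :: 'E' :: ']' :: st) by
            rw [pvPreStep]; rw [if_pos rfl, if_neg hdig, if_pos hbr]] at h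
          obtain ⟨t1, r1, hr1, hg1, hf1⟩ := ih s1 (by simpa using hs) (',' :: 'E' :: ']' :: st) h
          obtain ⟨r2, hr2, hf2⟩ := pvExpect ',' ('E' :: ']' :: st) r1 (by decide) hf1
          have hr2len : r2.length ≤ N := by
            have h1 : s1.length = (pvSer t1).length + r1.length := by rw [hr1]; simp
            have h2 : r1.length = 1 + r2.length := by rw [hr2]; simp; omega
            simp at hs
            omega
          obtain ⟨t2, r3, hr3, hg2, hf3⟩ := ih r2 hr2len (']' :: st) hf2
          obtain ⟨r4, hr4, hf4⟩ := pvExpect ']' st r3 (by decide) hf3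
          refine ⟨.pair t1 t2, r4, ?_, ?_, hf4⟩
          · rw [hbr.1, hr1, hr2, hr3, hr4, pvSer]
            simp
          · refine ⟨by have := hbr.2; omega, ?_, ?_⟩
            · have : (',' :: 'E' :: ']' :: st).count ']' = st.count ']' + 1 := by
                simp [List.count_cons]
              rw [this] at hg1
              exact hg1
            · have : (']' :: st).count ']' = st.count ']' + 1 := by
                simp [List.count_cons]
              rw [this] at hg2
              exact hg2
        · rw [show pvPreStep (some ('E' :: st)) c = none by
            rw [pvPreStep]; rw [if_pos rfl, if_neg hdig, if_neg hbr]] at h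
          rw [pvFoldl_none] at h
          exact absurd h (by simp)

-- ---- the parser recovers the tree from its rendering ----

def pvHeight : SF → Nat
  | .leaf _ => 0
  | .pair a b => max (pvHeight a) (pvHeight b) + 1

theorem pvHeight_le (t : SF) : pvHeight t ≤ (pvSer t).length := by
  induction t with
  | leaf n => simp [pvHeight]
  | pair a b iha ihb =>
    simp only [pvHeight, pvSer, List.length_cons, List.length_append]
    omega

theorem pvSer_all_digit (n : Int) (h : 0 ≤ n) :
    ∀ c ∈ PySem.Int.toChars n, PySem.Chars.isdigit c = true := by
  intro c hc
  rw [pvToChars_nonneg n h] at hc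
  have hd := Nat.isDigit_of_mem_toDigits (by norm_num) (by norm_num) hc
  simp [Char.isDigit] at hd
  simp [PySem.Chars.isdigit]
  exact ⟨Char.le_def.mpr hd.1, Char.le_def.mpr hd.2⟩

theorem pvDigits_toChars (n : Int) (h : 0 ≤ n) : pvDigits (PySem.Int.toChars n) = n := by
  rw [pvToChars_nonneg n h, pvDigits_toDigits]
  omega

theorem pvParse_ser (t : SF) : ∀ (fuel : Nat) (d : Nat), pvGoodT d t → pvHeight t < fuel →
    ∀ (r : List Char), pvParse fuel (pvSer t ++ r) = some (t, r) := by
  induction t with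
  | leaf n =>
    intro fuel d hv hh r
    obtain ⟨f, rfl⟩ : ∃ f, fuel = f + 1 := ⟨fuel - 1, by omega⟩
    obtain ⟨h0, h9⟩ := hv
    have hcs : PySem.Int.toChars n = [Nat.digitChar n.toNat] := by
      rw [pvToChars_nonneg n h0, Nat.toDigits_of_lt_base (by omega)]
    have hdig : PySem.Chars.isdigit (Nat.digitChar n.toNat) = true := by
      have := pvSer_all_digit n h0
      rw [hcs] at this
      exact this _ (by simp)
    rw [pvSer, hcs, List.cons_append, pvParse]
    rw [if_neg (by intro hc; rw [hc] at hdig; exact absurd hdig (by decide))]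
    rw [if_pos hdig]
    have hval : pvDigits [Nat.digitChar n.toNat] = n := by
      have := pvDigits_toChars n h0
      rw [hcs] at this
      exact this
    rw [hval]
    simp
  | pair a b iha ihb =>
    intro fuel d hv hh r
    obtain ⟨f, rfl⟩ : ∃ f, fuel = f + 1 := ⟨fuel - 1, by omega⟩
    have hsh : pvSer (.pair a b) ++ r = '[' :: (pvSer a ++ (',' :: (pvSer b ++ (']' :: r)))) := by
      rw [pvSer]; simp
    rw [hsh, pvParse, if_pos rfl]
    rw [iha f (d + 1) hv.2.1 (by simp [pvHeight] at hh ⊢; omega) _]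
    simp only [ihb f (d + 1) hv.2.2 (by simp [pvHeight] at hh ⊢; omega) (']' :: r)]

-- ---- soundness of the parser and the inert machine ----
def pvSmall : SF → Prop
  | .leaf n => 0 ≤ n ∧ n ≤ 9
  | .pair a b => pvSmall a ∧ pvSmall b

theorem pvParse_sound : ∀ (fuel : Nat) (s : List Char) (t : SF) (r : List Char),
    pvParse fuel s = some (t, r) → s = pvSer t ++ r ∧ pvSmall t := by
  intro fuel
  induction fuel with
  | zero => intro s t r h; exact absurd h (by rw [pvParse]; simp)
  | succ f ih =>
    intro s t r h
    cases s with
    | nil => exact absurd h (by rw [pvParse]; simp)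
    | cons c s1 =>
      rw [pvParse] at h
      split at h
      · -- c = '['
        rename_i hc
        split at h
        · -- pvParse f s1 = some (lft, ',' :: r2)
          rename_i lft r2 h1
          split at h
          · -- pvParse f r2 = some (rgt, ']' :: r3)
            rename_i rgt r3 h2
            simp only [Option.some.injEq, Prod.mk.injEq] at h
            obtain ⟨h3, h4⟩ := h
            obtain ⟨hs1, hsm1⟩ := ih s1 lft (',' :: r2) h1
            obtain ⟨hs2, hsm2⟩ := ih r2 rgt (']' :: r3) h2
            subst h4
            constructor
            · rw [hc, hs1, hs2, ← h3, pvSer]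
              simp
            · rw [← h3]
              exact ⟨hsm1, hsm2⟩
          · exact absurd h (by simp)
        · exact absurd h (by simp)
      · -- number
        split at h
        · rename_i hc hd
          simp only [Option.some.injEq, Prod.mk.injEq] at h
          obtain ⟨h1, h2⟩ := h
          obtain ⟨g1, g2⟩ := pvDigitBounds c hd
          have hv : pvDigits [c] = (c.toNat : Int) - 48 := by
            simp [pvDigits]
          constructor
          · rw [← h1, ← h2, pvSer, hv, pvToChars_digit c hd]
            simp
          · rw [← h1, hv]
            exact ⟨by omega, by omega⟩
        · exact absurd h (by simp)

-- ---- inert strings: the scans find nothing ----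
theorem pvInertStep_foldl_none (s : List Char) : List.foldl pvInertStep none s = none := by
  induction s with
  | nil => rfl
  | cons c r ih => exact ih

theorem pvSgl_ne_brk (c : Char) (h1 : c ≠ '[') (h2 : c ≠ ']') :
    String.ofList [c] ≠ "[" ∧ String.ofList [c] ≠ "]" := by
  constructor <;> intro hc <;> [apply h1; apply h2] <;>
    have := congrArg String.toList hc <;> simpa using this

theorem pvInert_scan : ∀ (s : List Char) (d : Nat) (a : List Int) (i : Int),
    (List.foldl pvInertStep (some d) s).isSome = true → a.length = d → d ≤ 4 →
    pvScanE (s.map (fun c => String.ofList [c])) a i = i + s.length - 1 := by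
  intro s
  induction s with
  | nil => intro d a i h ha hd; rw [List.map_nil, pvScanE_nil]; simp
  | cons c s' ih =>
    intro d a i h ha hd
    rw [List.foldl_cons] at h
    rw [List.map_cons]
    by_cases hc : c = '['
    · subst hc
      by_cases h4 : d + 1 ≤ 4
      · rw [show pvInertStep (some d) '[' = some (d + 1) by
          rw [pvInertStep]; rw [if_pos rfl, if_pos h4]] at h
        rw [show String.ofList ['['] = "[" from rfl,
            pvScanE_step_open a i _ (by omega),
            ih (d + 1) (a ++ [i]) (i + 1) h (by simp [ha]) (by omega)]
        simp only [List.length_cons]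
        push_cast; ring
      · rw [show pvInertStep (some d) '[' = none by
          rw [pvInertStep]; rw [if_pos rfl, if_neg h4], pvInertStep_foldl_none] at h
        simp at h
    · by_cases hcc : c = ']'
      · subst hcc
        by_cases h0 : d = 0
        · rw [show pvInertStep (some d) ']' = none by
            rw [pvInertStep]; rw [if_neg (by decide), if_pos rfl, if_pos h0],
            pvInertStep_foldl_none] at h
          simp at h
        · rw [show pvInertStep (some d) ']' = some (d - 1) by
            rw [pvInertStep]; rw [if_neg (by decide), if_pos rfl, if_neg h0]] at h
          rw [show String.ofList [']'] = "]" from rfl,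
              pvScanE_step_close a i _ (by simp [ha]; omega),
              ih (d - 1) a.dropLast (i + 1) h (by simp [ha]) (by omega)]
          simp only [List.length_cons]
          push_cast; ring
      · obtain ⟨hb1, hb2⟩ := pvSgl_ne_brk c hc hcc
        rw [show pvInertStep (some d) c = some d by
          rw [pvInertStep]; rw [if_neg hc, if_neg hcc]] at h
        rw [pvScanE_step_other _ _ _ _ hb1 hb2 (by omega),
            ih d a (i + 1) h ha hd]
        simp only [List.length_cons]
        push_cast; ring

theorem pvSgl_len (c : Char) : PySem.Str.len (String.ofList [c]) = 1 := by
  rw [PySem.Str.len_eq]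
  simp

theorem pvSmall_split (t : SF) (h : pvSmall t) : pvSplit t = none := by
  induction t with
  | leaf n => rw [pvSplit, if_neg (by have := h.2; omega)]
  | pair a b iha ihb => simp only [pvSplit, iha h.1, ihb h.2]

theorem pvSmallSer_digit (n : Int) (h : pvSmall (SF.leaf n)) :
    ∃ c, pvSer (.leaf n) = [c] ∧ c ≠ '[' ∧ c ≠ ']' := by
  obtain ⟨h0, h9⟩ := h
  refine ⟨Nat.digitChar n.toNat, ?_, ?_, ?_⟩
  · rw [pvSer, pvToChars_nonneg n h0, Nat.toDigits_of_lt_base (by omega)]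
  · have h10 : n.toNat < 10 := by omega
    interval_cases h' : n.toNat <;> decide
  · have h10 : n.toNat < 10 := by omega
    interval_cases h' : n.toNat <;> decide

theorem pvInert_expl : ∀ (t : SF) (d : Nat) (rest : List Char), pvSmall t →
    (List.foldl pvInertStep (some d) (pvSer t ++ rest)).isSome = true →
    pvExpl d t = none ∧ (List.foldl pvInertStep (some d) rest).isSome = true := by
  intro t
  induction t with
  | leaf n =>
    intro d rest hsm h
    obtain ⟨c, hcs, hb1, hb2⟩ := pvSmallSer_digit n hsm
    rw [hcs, List.cons_append, List.nil_append, List.foldl_cons,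
        show pvInertStep (some d) c = some d by
          rw [pvInertStep]; rw [if_neg hb1, if_neg hb2]] at h
    exact ⟨rfl, h⟩
  | pair a b iha ihb =>
    intro d rest hsm h
    rw [show pvSer (.pair a b) ++ rest
          = '[' :: (pvSer a ++ (',' :: (pvSer b ++ (']' :: rest)))) by rw [pvSer]; simp,
        List.foldl_cons] at h
    by_cases h4 : d + 1 ≤ 4
    · rw [show pvInertStep (some d) '[' = some (d + 1) by
        rw [pvInertStep]; rw [if_pos rfl, if_pos h4]] at h
      obtain ⟨hEa, h2⟩ := iha (d + 1) _ hsm.1 h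
      rw [List.foldl_cons, show pvInertStep (some (d + 1)) ',' = some (d + 1) by
        rw [pvInertStep]; rw [if_neg (by decide), if_neg (by decide)]] at h2
      obtain ⟨hEb, h3⟩ := ihb (d + 1) _ hsm.2 h2
      rw [List.foldl_cons, show pvInertStep (some (d + 1)) ']' = some d by
        rw [pvInertStep]; simp] at h3
      refine ⟨?_, h3⟩
      rw [pvExpl, if_neg (by rintro ⟨hg, -⟩; omega), hEa, hEb]
    · rw [show pvInertStep (some d) '[' = none by
        rw [pvInertStep]; rw [if_pos rfl, if_neg h4], pvInertStep_foldl_none] at h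
      simp at h

theorem pvLoopB_id (t : SF) (hE : pvExpl 0 t = none) (hS : pvSplit t = none)
    (fuel : Nat) : pvLoopB fuel t = t := by
  cases fuel with
  | zero => rfl
  | succ f => simp only [pvLoopB, hE, hS]

theorem pvLoopA_id (l : List String) (h : pvStepA l = none) (fuel : Nat) :
    pvLoopA fuel l = l := by
  cases fuel with
  | zero => rfl
  | succ f => simp only [pvLoopA, h]

-- ---- rendering relations ----
theorem pvMapSingle (t : SF) (d : Nat) (hg : pvGoodT d t) :
    (pvSer t).map (fun c => String.ofList [c]) = pvToks t := by
  induction t generalizing d with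
  | leaf n =>
    obtain ⟨h0, h9⟩ := hg
    rw [pvSer, pvToks, pvToChars_nonneg n h0, Nat.toDigits_of_lt_base (by omega)]
    simp only [List.map_cons, List.map_nil]
    congr 1
    have hofl : String.ofList ((PySem.Int.toStr n).toList) = PySem.Int.toStr n :=
      String.ofList_toList
    rw [← hofl, PySem.Int.toList_toStr, pvToChars_nonneg n h0,
        Nat.toDigits_of_lt_base (by omega)]
  | pair a b iha ihb =>
    rw [pvSer, pvToks]
    simp only [List.map_cons, List.map_append, List.map_nil]
    rw [iha (d + 1) hg.2.1, ihb (d + 1) hg.2.2]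

theorem pvJoinNil (ls : List (List Char)) : PySem.Chars.join [] ls = ls.flatten := by
  induction ls with
  | nil => rfl
  | cons a ls ih =>
    cases ls with
    | nil => simp [PySem.Chars.join, List.intercalate]
    | cons b r =>
      rw [PySem.Chars.join_cons_cons] at *
      simp [ih]

theorem pvFlatten_toks (t : SF) : ((pvToks t).map String.toList).flatten = pvSer t := by
  induction t with
  | leaf n => simp [pvToks, pvSer, PySem.Int.toList_toStr]
  | pair a b iha ihb =>
    simp [pvToks, pvSer, iha, ihb]

theorem pvJoin_toks (t : SF) :
    PySem.Str.join "" (pvToks t) = String.ofList (pvSer t) := by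
  rw [PySem.Str.join, show ("" : String).toList = [] from rfl, pvJoinNil, pvFlatten_toks]

theorem pvJoin_singletons (s : List Char) :
    PySem.Str.join "" (s.map (fun c => String.ofList [c])) = String.ofList s := by
  rw [PySem.Str.join, show ("" : String).toList = [] from rfl, pvJoinNil]
  congr 1
  induction s with
  | nil => rfl
  | cons c s' ih =>
    rw [List.map_cons, List.map_cons, List.flatten_cons, ih]
    simp

theorem pvGood_leaf9 (t : SF) (hg : pvGoodT 0 t) : ∀ n, t = SF.leaf n → n ≤ 9 := by
  intro n hn
  rw [hn] at hg
  exact hg.2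

-- ===== VERDICT (by name: the statement is the Claim_ definition above) =====
theorem reduce_expr_spec : Claim_equal_reduce_expr := by
  intro expr hdom hpre
  show reduce_expr expr = reduce_expr_alt expr
  obtain ⟨hne, harm⟩ := hpre
  rcases harm with hinert | hsnail
  · -- bracket-inert: both sides return the input unchanged
    have hscan0 : pvScanE (expr.toList.map (fun c => String.ofList [c])) [] 0
        = ((expr.toList.map (fun c => String.ofList [c])).length : Int) - 1 := by
      rw [pvInert_scan expr.toList 0 [] 0 hinert rfl (by omega)]
      simp
    have hstep : pvStepA (expr.toList.map (fun c => String.ofList [c])) = none :=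
      pvStepA_none_core _
        (by intro s hs
            simp at hs
            obtain ⟨c, -, rfl⟩ := hs
            exact pvSgl_len c) hscan0
    simp only [reduce_expr, reduce_expr_alt]
    rw [pvLoopA_id _ hstep, pvJoin_singletons]
    cases hp : pvParse (expr.toList.length + 1) expr.toList with
    | none => exact String.ofList_toList
    | some p =>
      obtain ⟨t, r⟩ := p
      cases r with
      | cons c r' => exact String.ofList_toList
      | nil =>
        obtain ⟨hsr, hsmall⟩ := pvParse_sound _ _ _ _ hp
        rw [List.append_nil] at hsr
        have hinert' := hinert
        rw [hsr, show pvSer t = pvSer t ++ [] by simp] at hinert'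
        obtain ⟨hE, -⟩ := pvInert_expl t 0 [] hsmall hinert'
        have hS := pvSmall_split t hsmall
        show String.ofList expr.toList
            = String.ofList (pvSer (pvLoopB (1000 + 1000 * expr.toList.length) t))
        rw [pvLoopB_id t hE hS, ← hsr, String.ofList_toList]
  · -- well-formed snailfish expression: the tree reduction matches A's token surgery
    obtain ⟨t0, r, hsr, hg, hf⟩ :=
      pvPre_sound expr.toList.length expr.toList (le_refl _) [] hsnail
    have hr : r = [] := by
      cases r with
      | nil => rfl
      | cons c r' =>
        rw [List.foldl_cons, (show pvPreStep (some []) c = none from rfl), pvFoldl_none] at hf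
        exact absurd hf (by simp)
    subst hr
    rw [List.append_nil] at hsr
    have hg0 : pvGoodT 0 t0 := by simpa using hg
    have hv0 := pvGood_vld t0 0 hg0
    have hparse : pvParse ((pvSer t0).length + 1) (pvSer t0) = some (t0, []) := by
      have h := pvParse_ser t0 ((pvSer t0).length + 1) 0 hg0
        (by have := pvHeight_le t0; omega) []
      simpa using h
    have hlen : (pvToks t0).length = (pvSer t0).length := by
      rw [← pvMapSingle t0 0 hg0]; simp
    simp only [reduce_expr, reduce_expr_alt]
    rw [hsr, pvMapSingle t0 0 hg0, hparse, hlen,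
        pvLoop_corr (1000 + 1000 * (pvSer t0).length) t0 hv0 (pvGood_leaf9 t0 hg0),
        pvJoin_toks]
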